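-- pv_equiv track=rewrite | github.com/daiuc/leafcutter2 | scripts/leafcutter_make_clusters.py | refine_linked
-- ===== SOURCE A (Python) =====
-- def refine_linked(clusters):
--     '''Re-cluster introns into clusters of linked introns
--
--     Linked introns are introns that share either 5' or 3' splice site
--
--     Parameters:
--     -----------
--     clusters : tuple
--         format is [((start, end), reads)], eg.
--         [((413430, 423479), 3), ((410646, 413144), 3), ((410646, 413147), 62), ((410646, 420671), 4)]
--
--     Returns:
--     --------
--     return : list of list
--         base element is a tuple, format: ((start, end), reads). e.g.
--         [[((413430, 423479), 3)], [((410646, 413144), 3), ((410646, 413147), 62), ((410646, 420671), 4)]]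
--     '''
--
--     unassigned = [x for x in clusters[1:]]
--     current = [clusters[0]]
--     splicesites = set([current[0][0][0],current[0][0][1]]) # start & end of intron
--     newClusters = []
--     lastIntron = False
--     while len(unassigned) > 0:
--         finished = False
--
--         while not finished:
--             torm = [] # list fo introns to remove from unassigned
--             finished = True
--             for intron in unassigned:
--                 (start, end), count = intron
--                 if start in splicesites or end in splicesites: # if overlapping 5' or 3'
--                     current.append(intron) # store intron
--                     splicesites.add(start) # store 5' and 3' to splicesites
--                     splicesites.add(end)
--                     finished = False
--                     torm.append(intron) # mark to remove after check linkage
--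
--             for intron in torm:
--                 unassigned.remove(intron)
--
--         newClusters.append(current)
--         current = []
--         if len(unassigned) > 0:
--             current = [unassigned[0]]
--             splicesites = set([current[0][0][0],current[0][0][1]])
--             if len(unassigned) == 1: # assign the last intron
--                 newClusters.append(current)
--             unassigned = unassigned[1:]
--
--     return newClusters
-- ===== SOURCE B (Python) =====
-- def refine_linked(clusters):
--     if not clusters:
--         return []
--     # Phase 1: merge splice sites into linked components (small-to-large merging).
--     comp = {}      # splice site -> component id
--     sites_of = {}  # component id -> list of sites currently labelled with that id
--     nid = 0
--     for (s, e), _ in clusters: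
--         cs = comp.get(s)
--         ce = comp.get(e)
--         if cs is None and ce is None:
--             comp[s] = nid
--             comp[e] = nid
--             sites_of[nid] = [s] if s == e else [s, e]
--             nid += 1
--         elif cs is None:
--             comp[s] = ce
--             sites_of[ce].append(s)
--         elif ce is None:
--             comp[e] = cs
--             sites_of[cs].append(e)
--         elif cs != ce:
--             a, b = (cs, ce) if len(sites_of[cs]) >= len(sites_of[ce]) else (ce, cs)
--             for x in sites_of[b]:
--                 comp[x] = a
--             sites_of[a].extend(sites_of[b])
--             del sites_of[b]
--     # Phase 2: bucket introns by component, components in first-appearance order.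
--     buckets = {}
--     for intron in clusters:
--         c = comp[intron[0][0]]
--         if c not in buckets:
--             buckets[c] = []
--         buckets[c].append(intron)
--     # Phase 3: replay the eager round-by-round expansion inside each component
--     # (introns of other components can never match, so this reproduces the order).
--     out = []
--     for members in buckets.values():
--         cluster = [members[0]]
--         sites = {members[0][0][0], members[0][0][1]}
--         rest = members[1:]
--         while rest:
--             torm = []
--             for intron in rest:
--                 (s, e), _ = intron
--                 if s in sites or e in sites:
--                     cluster.append(intron)
--                     sites.add(s)
--                     sites.add(e)
--                     torm.append(intron)
--             if not torm:
--                 break  # unreachable: members form one linked component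
--             # drop, for each matched value, that many first occurrences (= list.remove each)
--             need = {}
--             for intron in torm:
--                 need[intron] = need.get(intron, 0) + 1
--             newrest = []
--             for intron in rest:
--                 k = need.get(intron, 0)
--                 if k:
--                     need[intron] = k - 1
--                 else:
--                     newrest.append(intron)
--             rest = newrest
--         out.append(cluster)
--     return out
-- ===== Notes on version B (the rewrite author's own statement) =====
-- stated objective: faster
-- what changed: A repeatedly rescans the whole remaining list (and does O(n) list.remove calls) to grow each cluster; B builds a splice-site -> component index once with small-to-large merging, buckets introns per component, and replays the eager round expansion only inside each (typically tiny) component.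
-- intended difference: On single-element input A returns [] (the while-loop body never runs, so the lone intron is never emitted), while B returns [[intron]], the intended one-cluster result. — e.g. on refine_linked([((0, 1), 2)]): A returns [], B returns [[((0, 1), 2)]]
-- outside the precondition, e.g. on refine_linked([]): A raises IndexError, B returns []
import Mathlib
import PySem

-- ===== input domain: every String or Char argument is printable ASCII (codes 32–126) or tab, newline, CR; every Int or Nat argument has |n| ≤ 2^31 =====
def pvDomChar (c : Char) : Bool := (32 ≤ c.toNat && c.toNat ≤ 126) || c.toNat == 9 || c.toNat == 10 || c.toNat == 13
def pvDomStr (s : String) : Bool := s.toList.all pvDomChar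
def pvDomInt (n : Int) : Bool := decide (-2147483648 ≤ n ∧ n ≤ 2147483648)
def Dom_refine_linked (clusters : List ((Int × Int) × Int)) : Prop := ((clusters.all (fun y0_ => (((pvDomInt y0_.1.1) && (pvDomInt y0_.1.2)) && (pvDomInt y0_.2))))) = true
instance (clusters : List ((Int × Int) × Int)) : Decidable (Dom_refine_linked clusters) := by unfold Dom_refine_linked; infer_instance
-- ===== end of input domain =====

-- B computes the linked components once via a splice-site index with small-to-large
-- merging and replays the eager expansion only inside each component, instead of A's
-- repeated rescans of the whole remaining list. On single-element input A returns []
-- (its loop body never runs), B returns the one-cluster result (difference D_ below).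

abbrev PVIntron : Type := (Int × Int) × Int

-- ===== PORT A =====
-- inner `for intron in unassigned` loop; state (current, splicesites, finished, torm)
def aPass : List PVIntron → List PVIntron → PySem.Set Int → Bool → List PVIntron →
    List PVIntron × PySem.Set Int × Bool × List PVIntron
  | [], cur, ss, fin, torm => (cur, ss, fin, torm)
  | i :: rest, cur, ss, fin, torm =>
    if PySem.Set.contains ss i.1.1 || PySem.Set.contains ss i.1.2 then
      aPass rest (cur ++ [i]) (PySem.Set.add (PySem.Set.add ss i.1.1) i.1.2) false (torm ++ [i])
    else
      aPass rest cur ss fin torm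

-- `for intron in torm: unassigned.remove(intron)` (remove? never fails here: torm values ∈ unassigned)
def aRemove (u : List PVIntron) (torm : List PVIntron) : List PVIntron :=
  torm.foldl (fun u i => (PySem.List.remove? u i).getD u) u

-- the `while not finished` loop; fuel u.length + 1 always suffices (a non-finished pass removes ≥ 1)
def aExpand : Nat → List PVIntron → PySem.Set Int → List PVIntron → List PVIntron × List PVIntron
  | 0, cur, _, u => (cur, u)
  | fuel+1, cur, ss, u =>
    let r := aPass u cur ss true []
    if r.2.2.1 then (r.1, u) else aExpand fuel r.1 r.2.1 (aRemove u r.2.2.2)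

-- the outer `while len(unassigned) > 0` loop; fuel (#introns) suffices (each turn consumes ≥ 1 intron)
def aOuter : Nat → List (List PVIntron) → List PVIntron → PySem.Set Int → List PVIntron →
    List (List PVIntron)
  | _, acc, _, _, [] => acc
  | 0, acc, _, _, _ :: _ => acc
  | fuel+1, acc, cur, ss, u =>
    let r := aExpand (u.length + 1) cur ss u
    let acc' := acc ++ [r.1]
    match r.2 with
    | [] => acc'
    | seed :: rest =>
      aOuter fuel (if rest = [] then acc' ++ [[seed]] else acc') [seed]
        (PySem.Set.ofList [seed.1.1, seed.1.2]) rest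

def refine_linked (clusters : List ((Int × Int) × Int)) : List (List ((Int × Int) × Int)) :=
  match clusters with
  | [] => []  -- Python raises IndexError here (clusters[0]); excluded by Pre_
  | c :: rest => aOuter clusters.length [] [c] (PySem.Set.ofList [c.1.1, c.1.2]) rest

-- ===== PORT B =====
-- Phase 1: one union step per intron (comp : site → component id, sitesOf : id → its sites)
def bUnionStep : PySem.Dict Int Int × PySem.Dict Int (List Int) × Int → PVIntron →
    PySem.Dict Int Int × PySem.Dict Int (List Int) × Int
  | (comp, sitesOf, nid), i =>
    match comp.get? i.1.1, comp.get? i.1.2 with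
    | none, none =>
        ((comp.insert i.1.1 nid).insert i.1.2 nid,
         sitesOf.insert nid (if i.1.1 = i.1.2 then [i.1.1] else [i.1.1, i.1.2]), nid + 1)
    | none, some ce => (comp.insert i.1.1 ce, sitesOf.modify ce [] (· ++ [i.1.1]), nid)
    | some cs, none => (comp.insert i.1.2 cs, sitesOf.modify cs [] (· ++ [i.1.2]), nid)
    | some cs, some ce =>
      if cs = ce then (comp, sitesOf, nid)
      else
        let ab := if (sitesOf.getD cs []).length ≥ (sitesOf.getD ce []).length
                  then (cs, ce) else (ce, cs)
        let bl := sitesOf.getD ab.2 []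
        (bl.foldl (fun c x => c.insert x ab.1) comp,
         (sitesOf.modify ab.1 [] (· ++ bl)).erase ab.2, nid)

def bComp (clusters : List PVIntron) : PySem.Dict Int Int :=
  (clusters.foldl bUnionStep (PySem.Dict.empty, PySem.Dict.empty, 0)).1

-- Phase 2: bucket introns by component id of their start site (comp[start] never misses: getD)
def bBuckets (clusters : List PVIntron) (comp : PySem.Dict Int Int) :
    PySem.Dict Int (List PVIntron) :=
  clusters.foldl (fun d i => d.modify (comp.getD i.1.1 0) [] (· ++ [i])) PySem.Dict.empty

-- Phase 3: replay of the eager expansion inside one component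
def bPass : List PVIntron → List PVIntron → PySem.Set Int → List PVIntron →
    List PVIntron × PySem.Set Int × List PVIntron
  | [], cl, ss, torm => (cl, ss, torm)
  | i :: rest, cl, ss, torm =>
    if PySem.Set.contains ss i.1.1 || PySem.Set.contains ss i.1.2 then
      bPass rest (cl ++ [i]) (PySem.Set.add (PySem.Set.add ss i.1.1) i.1.2) (torm ++ [i])
    else
      bPass rest cl ss torm

-- `need = {}; for intron in torm: need[intron] = need.get(intron, 0) + 1`
def bNeed (torm : List PVIntron) : PySem.Dict PVIntron Int :=
  torm.foldl (fun d i => d.insert i (d.getD i 0 + 1)) PySem.Dict.empty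

-- drop, for each matched value, that many first occurrences
def bDrop (rest : List PVIntron) (need : PySem.Dict PVIntron Int) : List PVIntron :=
  (rest.foldl (fun acc i =>
      let k := acc.2.getD i 0
      if k ≠ 0 then (acc.1, acc.2.insert i (k - 1)) else (acc.1 ++ [i], acc.2))
    (([] : List PVIntron), need)).1

-- `while rest:` loop; fuel rest.length + 1 always suffices (a non-broken turn drops ≥ 1)
def bExpand : Nat → List PVIntron → PySem.Set Int → List PVIntron → List PVIntron
  | 0, cl, _, _ => cl
  | fuel+1, cl, ss, rest =>
    match rest with
    | [] => cl
    | _ :: _ =>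
      let r := bPass rest cl ss []
      if r.2.2 = [] then r.1
      else bExpand fuel r.1 r.2.1 (bDrop rest (bNeed r.2.2))

def bReplay (members : List PVIntron) : List PVIntron :=
  match members with
  | [] => []  -- unreachable: every bucket is nonempty
  | m :: rest => bExpand (rest.length + 1) [m] (PySem.Set.ofList [m.1.1, m.1.2]) rest

def refine_linked_alt (clusters : List ((Int × Int) × Int)) : List (List ((Int × Int) × Int)) :=
  match clusters with
  | [] => []
  | _ :: _ => ((bBuckets clusters (bComp clusters)).values).map bReplay

-- ===== PRECONDITION & SPEC =====
-- Pre_ excludes only the empty list, on which A raises IndexError (clusters[0]).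
def Pre_refine_linked (clusters : List ((Int × Int) × Int)) : Prop := clusters ≠ []
instance (clusters : List ((Int × Int) × Int)) : Decidable (Pre_refine_linked clusters) := by
  unfold Pre_refine_linked; infer_instance
def pvWitness_refine_linked : (List ((Int × Int) × Int)) := [((0, 1), 2), ((1, 5), 3)]

-- On single-element input A returns [] (its while-loop body never runs, so the lone intron is
-- never emitted), B returns [[intron]], the intended one-cluster result.
def D_refine_linked (clusters : List ((Int × Int) × Int)) : Prop := clusters.length = 1
instance (clusters : List ((Int × Int) × Int)) : Decidable (D_refine_linked clusters) := by
  unfold D_refine_linked; infer_instance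

def Spec_refine_linked (clusters : List ((Int × Int) × Int)) (out : List (List ((Int × Int) × Int))) : Prop :=
  ¬ D_refine_linked clusters → out = refine_linked_alt clusters
instance (clusters : List ((Int × Int) × Int)) (out : List (List ((Int × Int) × Int))) : Decidable (Spec_refine_linked clusters out) := by
  unfold Spec_refine_linked; infer_instance

def pvDiffWitness_refine_linked : (List ((Int × Int) × Int)) := [((0, 1), 2)]
def pvDiffWitnessOut_refine_linked : (List (List ((Int × Int) × Int))) × (List (List ((Int × Int) × Int))) :=
  ([], [[((0, 1), 2)]])

-- ===== CLAIM (what is proved, stated in full; the proofs are below) =====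
def Claim_unchanged_refine_linked : Prop := ∀ (clusters : List ((Int × Int) × Int)), Dom_refine_linked clusters → Pre_refine_linked clusters → Spec_refine_linked clusters (refine_linked clusters)
def Claim_changed_refine_linked : Prop := Dom_refine_linked (pvDiffWitness_refine_linked) ∧ Pre_refine_linked (pvDiffWitness_refine_linked) ∧ D_refine_linked (pvDiffWitness_refine_linked) ∧ refine_linked (pvDiffWitness_refine_linked) = pvDiffWitnessOut_refine_linked.1 ∧ refine_linked_alt (pvDiffWitness_refine_linked) = pvDiffWitnessOut_refine_linked.2 ∧ pvDiffWitnessOut_refine_linked.1 ≠ pvDiffWitnessOut_refine_linked.2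
def Claim_exact_refine_linked : Prop := ∀ (clusters : List ((Int × Int) × Int)), Dom_refine_linked clusters → Pre_refine_linked clusters → D_refine_linked clusters → refine_linked clusters ≠ refine_linked_alt clusters

-- ===== LEMMAS AND PROOFS =====

-- ---------- S1: single-pass lemmas ----------

theorem pv_bPass_cons_pos {i : PVIntron} {ss : PySem.Set Int}
    (h : (PySem.Set.contains ss i.1.1 || PySem.Set.contains ss i.1.2) = true)
    (rest cl torm : List PVIntron) :
    bPass (i :: rest) cl ss torm =
      bPass rest (cl ++ [i]) (PySem.Set.add (PySem.Set.add ss i.1.1) i.1.2) (torm ++ [i]) := by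
  simp only [bPass]; rw [if_pos h]

theorem pv_bPass_cons_neg {i : PVIntron} {ss : PySem.Set Int}
    (h : ¬ (PySem.Set.contains ss i.1.1 || PySem.Set.contains ss i.1.2) = true)
    (rest cl torm : List PVIntron) :
    bPass (i :: rest) cl ss torm = bPass rest cl ss torm := by
  simp only [bPass]; rw [if_neg h]

theorem pv_aPass_cons_pos {i : PVIntron} {ss : PySem.Set Int}
    (h : (PySem.Set.contains ss i.1.1 || PySem.Set.contains ss i.1.2) = true)
    (rest cl torm : List PVIntron) (fin : Bool) :
    aPass (i :: rest) cl ss fin torm =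
      aPass rest (cl ++ [i]) (PySem.Set.add (PySem.Set.add ss i.1.1) i.1.2) false (torm ++ [i]) := by
  simp only [aPass]; rw [if_pos h]

theorem pv_aPass_cons_neg {i : PVIntron} {ss : PySem.Set Int}
    (h : ¬ (PySem.Set.contains ss i.1.1 || PySem.Set.contains ss i.1.2) = true)
    (rest cl torm : List PVIntron) (fin : Bool) :
    aPass (i :: rest) cl ss fin torm = aPass rest cl ss fin torm := by
  simp only [aPass]; rw [if_neg h]

theorem pv_bPass_shape (u : List PVIntron) : ∀ (cl : List PVIntron) (ss : PySem.Set Int)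
    (torm : List PVIntron), ∃ d : List PVIntron,
    (bPass u cl ss torm).1 = cl ++ d ∧
    (bPass u cl ss torm).2.2 = torm ++ d ∧
    (∀ i ∈ d, i ∈ u) ∧
    (∀ x ∈ ss, x ∈ (bPass u cl ss torm).2.1) ∧
    (∀ i ∈ d, i.1.1 ∈ (bPass u cl ss torm).2.1 ∧ i.1.2 ∈ (bPass u cl ss torm).2.1) := by
  induction u with
  | nil => intro cl ss torm; exact ⟨[], by simp [bPass]⟩
  | cons i rest ih =>
    intro cl ss torm
    by_cases h : (PySem.Set.contains ss i.1.1 || PySem.Set.contains ss i.1.2) = true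
    · rw [pv_bPass_cons_pos h]
      obtain ⟨d, h1, h2, h3, h4, h5⟩ := ih (cl ++ [i])
        (PySem.Set.add (PySem.Set.add ss i.1.1) i.1.2) (torm ++ [i])
      refine ⟨i :: d, ?_, ?_, ?_, ?_, ?_⟩
      · rw [h1]; simp
      · rw [h2]; simp
      · intro j hj; rcases List.mem_cons.mp hj with rfl | hj
        · exact List.mem_cons_self
        · exact List.mem_cons_of_mem _ (h3 j hj)
      · intro x hx
        exact h4 x (by simp [PySem.Set.mem_add, hx])
      · intro j hj; rcases List.mem_cons.mp hj with rfl | hj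
        · exact ⟨h4 _ (by simp [PySem.Set.mem_add]), h4 _ (by simp [PySem.Set.mem_add])⟩
        · exact h5 j hj
    · rw [pv_bPass_cons_neg h]
      obtain ⟨d, h1, h2, h3, h4, h5⟩ := ih cl ss torm
      exact ⟨d, h1, h2, fun j hj => List.mem_cons_of_mem _ (h3 j hj), h4, h5⟩

theorem pv_aPass_eq (u : List PVIntron) : ∀ (cl : List PVIntron) (ss : PySem.Set Int)
    (fin : Bool) (torm : List PVIntron),
    aPass u cl ss fin torm = ((bPass u cl ss torm).1, (bPass u cl ss torm).2.1,
      fin && decide ((bPass u cl ss torm).2.2 = torm), (bPass u cl ss torm).2.2) := by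
  induction u with
  | nil => intro cl ss fin torm; simp [aPass, bPass]
  | cons i rest ih =>
    intro cl ss fin torm
    by_cases h : (PySem.Set.contains ss i.1.1 || PySem.Set.contains ss i.1.2) = true
    · rw [pv_aPass_cons_pos h, pv_bPass_cons_pos h, ih]
      obtain ⟨d, _, h2, _, _, _⟩ := pv_bPass_shape rest (cl ++ [i])
        (PySem.Set.add (PySem.Set.add ss i.1.1) i.1.2) (torm ++ [i])
      have hne : (bPass rest (cl ++ [i]) (PySem.Set.add (PySem.Set.add ss i.1.1) i.1.2)
          (torm ++ [i])).2.2 ≠ torm := by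
        rw [h2]; intro hc
        have := congrArg List.length hc
        simp at this
      simp [hne]
    · rw [pv_aPass_cons_neg h, pv_bPass_cons_neg h, ih]

-- ---------- S2: removal lemmas ----------

def pvRF (u : List PVIntron) (v : PVIntron) : List PVIntron :=
  (PySem.List.remove? u v).getD u

theorem pv_aRemove_nil (u : List PVIntron) : aRemove u [] = u := rfl

theorem pv_aRemove_cons (u : List PVIntron) (v : PVIntron) (t : List PVIntron) :
    aRemove u (v :: t) = aRemove (pvRF u v) t := rfl

theorem pv_pvRF_of_mem {u : List PVIntron} {v : PVIntron} (h : v ∈ u) :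
    pvRF u v = u.erase v := by
  simp [pvRF, PySem.List.remove?_eq_some_erase u v h]

theorem pv_pvRF_of_not_mem {u : List PVIntron} {v : PVIntron} (h : v ∉ u) :
    pvRF u v = u := by
  simp [pvRF, (PySem.List.remove?_eq_none_iff u v).mpr h]

theorem pv_pvRF_cons_ne {x t : PVIntron} (hxt : x ≠ t) (u : List PVIntron) :
    pvRF (x :: u) t = x :: pvRF u t := by
  unfold pvRF
  rw [PySem.List.remove?_cons_of_ne u hxt]
  cases h : PySem.List.remove? u t <;> simp [h]

theorem pv_pvRF_subset {u : List PVIntron} {v : PVIntron} : ∀ x ∈ pvRF u v, x ∈ u := by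
  by_cases h : v ∈ u
  · rw [pv_pvRF_of_mem h]; intro x hx; exact List.mem_of_mem_erase hx
  · rw [pv_pvRF_of_not_mem h]; exact fun x hx => hx

theorem pv_pvRF_length_le (u : List PVIntron) (v : PVIntron) :
    (pvRF u v).length ≤ u.length := by
  by_cases h : v ∈ u
  · rw [pv_pvRF_of_mem h, List.length_erase]; split <;> omega
  · rw [pv_pvRF_of_not_mem h]

theorem pv_pvRF_length_lt {u : List PVIntron} {v : PVIntron} (h : v ∈ u) :
    (pvRF u v).length < u.length := by
  rw [pv_pvRF_of_mem h, List.length_erase, if_pos h]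
  have : u.length ≠ 0 := by
    intro hc; rw [List.length_eq_zero_iff] at hc; subst hc; simp at h
  omega

theorem pv_aRemove_length_le (t : List PVIntron) : ∀ u, (aRemove u t).length ≤ u.length := by
  induction t with
  | nil => intro u; simp [pv_aRemove_nil]
  | cons v ts ih =>
    intro u
    rw [pv_aRemove_cons]
    exact le_trans (ih _) (pv_pvRF_length_le u v)

theorem pv_aRemove_lt {t u : List PVIntron} (hne : t ≠ [])
    (hm : ∀ i ∈ t, i ∈ u) : (aRemove u t).length < u.length := by
  match t with
  | v :: ts =>
    rw [pv_aRemove_cons]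
    exact lt_of_le_of_lt (pv_aRemove_length_le ts _)
      (pv_pvRF_length_lt (hm v List.mem_cons_self))

theorem pv_aRemove_subset (t : List PVIntron) : ∀ u, ∀ x ∈ aRemove u t, x ∈ u := by
  induction t with
  | nil => intro u x hx; exact hx
  | cons v ts ih =>
    intro u x hx
    rw [pv_aRemove_cons] at hx
    exact pv_pvRF_subset x (ih _ x hx)

theorem pv_aRemove_mem (t : List PVIntron) : ∀ u x, x ∈ u → x ∉ aRemove u t → x ∈ t := by
  induction t with
  | nil => intro u x hx hnx; exact absurd hx hnx
  | cons v ts ih =>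
    intro u x hx hnx
    rw [pv_aRemove_cons] at hnx
    by_cases hxv : x = v
    · exact hxv ▸ List.mem_cons_self
    · refine List.mem_cons_of_mem _ (ih _ x ?_ hnx)
      by_cases h : v ∈ u
      · rw [pv_pvRF_of_mem h]; exact (List.mem_erase_of_ne hxv).mpr hx
      · rw [pv_pvRF_of_not_mem h]; exact hx

def pvDropCnt : List PVIntron → (PVIntron → Nat) → List PVIntron
  | [], _ => []
  | i :: rest, cnt =>
    if cnt i ≠ 0 then pvDropCnt rest (fun j => if j = i then cnt i - 1 else cnt j)
    else i :: pvDropCnt rest cnt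

theorem pv_dropCnt_cons_pos {cnt : PVIntron → Nat} {i : PVIntron} (h : cnt i ≠ 0)
    (rest : List PVIntron) :
    pvDropCnt (i :: rest) cnt = pvDropCnt rest (fun j => if j = i then cnt i - 1 else cnt j) := by
  simp only [pvDropCnt]; rw [if_pos h]

theorem pv_dropCnt_cons_neg {cnt : PVIntron → Nat} {i : PVIntron} (h : cnt i = 0)
    (rest : List PVIntron) :
    pvDropCnt (i :: rest) cnt = i :: pvDropCnt rest cnt := by
  simp only [pvDropCnt]; rw [if_neg (by simp [h])]

theorem pv_dropCnt_bump : ∀ (u : List PVIntron) (c : PVIntron → Nat) (t : PVIntron),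
    pvDropCnt u (fun v => if v = t then c t + 1 else c v) = pvDropCnt (pvRF u t) c := by
  intro u
  induction u with
  | nil => intro c t; rfl
  | cons x u ih =>
    intro c t
    by_cases hxt : x = t
    · subst hxt
      rw [pv_pvRF_of_mem List.mem_cons_self, List.erase_cons_head,
        pv_dropCnt_cons_pos (by simp)]
      have : (fun j => if j = x then (if x = x then c x + 1 else c x) - 1
          else if j = x then c x + 1 else c j) = c := by
        funext j; by_cases hj : j = x <;> simp [hj]
      rw [this]
    · rw [pv_pvRF_cons_ne hxt]
      have hbx : (if x = t then c t + 1 else c x) = c x := if_neg hxt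
      by_cases hcx : c x = 0
      · rw [pv_dropCnt_cons_neg (by simpa [hbx] using hcx), pv_dropCnt_cons_neg hcx, ih]
      · rw [pv_dropCnt_cons_pos (by simpa [hbx] using hcx), pv_dropCnt_cons_pos hcx]
        have heq : (fun j => if j = x then (if x = t then c t + 1 else c x) - 1
            else if j = t then c t + 1 else c j) =
            (fun v => if v = t then (fun j => if j = x then c x - 1 else c j) t + 1
              else (fun j => if j = x then c x - 1 else c j) v) := by
          funext j
          by_cases hjx : j = x
          · subst hjx; simp [hxt]
          · by_cases hjt : j = t
            · subst hjt; simp [hjx]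
            · simp [hjx, hjt]
        rw [heq]; exact ih _ t


theorem pv_aRemove_eq_dropCnt (torm : List PVIntron) : ∀ u,
    aRemove u torm = pvDropCnt u (fun v => torm.count v) := by
  induction torm with
  | nil =>
    intro u
    rw [pv_aRemove_nil]
    induction u with
    | nil => rfl
    | cons x u ihu => rw [pv_dropCnt_cons_neg (by simp)]; rw [← ihu]
  | cons t ts ih =>
    intro u
    rw [pv_aRemove_cons, ih]
    rw [← pv_dropCnt_bump u (fun v => ts.count v) t]
    congr 1
    funext v
    by_cases hv : v = t
    · simp [hv, List.count_cons]
    · simp [hv, List.count_cons]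
      exact fun hc => hv hc.symm

theorem pv_bDrop_foldl : ∀ (u acc : List PVIntron) (need : PySem.Dict PVIntron Int)
    (c : PVIntron → Nat), (∀ v, need.getD v 0 = (c v : Int)) →
    (List.foldl (fun acc i =>
        let k := acc.2.getD i 0
        if k ≠ 0 then (acc.1, acc.2.insert i (k - 1)) else (acc.1 ++ [i], acc.2))
      (acc, need) u).1 = acc ++ pvDropCnt u c := by
  intro u
  induction u with
  | nil => intro acc need c h; simp [pvDropCnt]
  | cons i rest ih =>
    intro acc need c h
    simp only [List.foldl_cons]
    by_cases hci : c i = 0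
    · rw [show (if need.getD i 0 ≠ 0 then (acc, need.insert i (need.getD i 0 - 1))
          else (acc ++ [i], need)) = (acc ++ [i], need) from by
        rw [if_neg (by simp [h i, hci])]]
      rw [ih (acc ++ [i]) need c h, pv_dropCnt_cons_neg hci, List.append_assoc]
      rfl
    · rw [show (if need.getD i 0 ≠ 0 then (acc, need.insert i (need.getD i 0 - 1))
          else (acc ++ [i], need)) = (acc, need.insert i (need.getD i 0 - 1)) from by
        rw [if_pos (by simp [h i]; exact_mod_cast hci)]]
      rw [pv_dropCnt_cons_pos hci]
      refine ih acc _ (fun j => if j = i then c i - 1 else c j) ?_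
      intro v
      rw [PySem.Dict.getD_insert]
      by_cases hv : v = i
      · subst hv
        have h1 : 1 ≤ c v := Nat.one_le_iff_ne_zero.mpr hci
        simp [h v]
        omega
      · simp [hv, h v]

theorem pv_bDrop_eq (u torm : List PVIntron) : bDrop u (bNeed torm) = aRemove u torm := by
  unfold bDrop bNeed
  rw [PySem.Dict.foldl_insert_getD_add_one_eq_counter,
    pv_bDrop_foldl u [] (PySem.Dict.counter torm) (fun v => torm.count v)
      (fun v => PySem.Dict.getD_counter torm v),
    pv_aRemove_eq_dropCnt]
  simp

-- ---------- S3: the common worklist loop ----------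

def pvExpandW (cl : List PVIntron) (ss : PySem.Set Int) (u : List PVIntron) :
    List PVIntron × List PVIntron :=
  let r := bPass u cl ss []
  if h : r.2.2 = [] then (r.1, u)
  else pvExpandW r.1 r.2.1 (aRemove u r.2.2)
termination_by u.length
decreasing_by
  obtain ⟨d, _, h2, h3, _, _⟩ := pv_bPass_shape u cl ss []
  simp only [List.nil_append] at h2
  exact pv_aRemove_lt (h2 ▸ h) (by rw [h2]; exact h3)

theorem pvExpandW_eq (cl : List PVIntron) (ss : PySem.Set Int) (u : List PVIntron) :
    pvExpandW cl ss u =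
      if h : (bPass u cl ss []).2.2 = [] then ((bPass u cl ss []).1, u)
      else pvExpandW (bPass u cl ss []).1 (bPass u cl ss []).2.1
        (aRemove u (bPass u cl ss []).2.2) := by
  rw [pvExpandW]

theorem pvExpandW_nil (cl : List PVIntron) (ss : PySem.Set Int) :
    pvExpandW cl ss [] = (cl, []) := by
  rw [pvExpandW]
  simp [bPass]

theorem pv_aExpand_eq : ∀ (fuel : Nat) (cl : List PVIntron) (ss : PySem.Set Int)
    (u : List PVIntron), u.length < fuel → aExpand fuel cl ss u = pvExpandW cl ss u := by
  intro fuel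
  induction fuel with
  | zero => intro cl ss u h; omega
  | succ f ih =>
    intro cl ss u h
    rw [pvExpandW]
    simp only [aExpand, pv_aPass_eq, Bool.true_and]
    by_cases hf : (bPass u cl ss []).2.2 = []
    · rw [if_pos (by simp [hf]), dif_pos hf]
    · rw [if_neg (by simp [hf]), dif_neg hf]
      refine ih _ _ _ ?_
      obtain ⟨d, _, h2, h3, _, _⟩ := pv_bPass_shape u cl ss []
      simp only [List.nil_append] at h2
      have := pv_aRemove_lt (t := (bPass u cl ss []).2.2) (u := u)
        hf (by rw [h2]; exact h3)
      omega

theorem pv_bExpand_eq : ∀ (fuel : Nat) (cl : List PVIntron) (ss : PySem.Set Int)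
    (u : List PVIntron), u.length < fuel → bExpand fuel cl ss u = (pvExpandW cl ss u).1 := by
  intro fuel
  induction fuel with
  | zero => intro cl ss u h; omega
  | succ f ih =>
    intro cl ss u h
    rw [pvExpandW]
    match u, h with
    | [], _ => simp [bExpand, bPass]
    | x :: u', h =>
      simp only [bExpand]
      by_cases hf : (bPass (x :: u') cl ss []).2.2 = []
      · rw [if_pos hf, dif_pos hf]
      · rw [if_neg hf, dif_neg hf, pv_bDrop_eq]
        refine ih _ _ _ ?_
        obtain ⟨d, _, h2, h3, _, _⟩ := pv_bPass_shape (x :: u') cl ss []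
        simp only [List.nil_append] at h2
        have := pv_aRemove_lt (t := (bPass (x :: u') cl ss []).2.2) (u := x :: u')
          hf (by rw [h2]; exact h3)
        omega


-- ---------- S4: connectivity of splice sites ----------

def pvEdge (L : List PVIntron) (x y : Int) : Prop :=
  ∃ i ∈ L, (i.1.1 = x ∧ i.1.2 = y) ∨ (i.1.1 = y ∧ i.1.2 = x)

def pvConn (L : List PVIntron) (x y : Int) : Prop := Relation.EqvGen (pvEdge L) x y

theorem pv_conn_mono {L M : List PVIntron} (h : ∀ i ∈ L, i ∈ M) {x y : Int}
    (hc : pvConn L x y) : pvConn M x y := by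
  induction hc with
  | rel a b hab =>
    obtain ⟨i, hi, hor⟩ := hab
    exact Relation.EqvGen.rel a b ⟨i, h i hi, hor⟩
  | refl a => exact Relation.EqvGen.refl a
  | symm a b _ ih => exact Relation.EqvGen.symm a b ih
  | trans a b c _ _ ih1 ih2 => exact Relation.EqvGen.trans a b c ih1 ih2

def pvSiteIn (L : List PVIntron) (x : Int) : Prop := ∃ i ∈ L, i.1.1 = x ∨ i.1.2 = x

theorem pv_conn_append {L : List PVIntron} {i : PVIntron} {x y : Int}
    (h : pvConn L x y) : pvConn (L ++ [i]) x y :=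
  pv_conn_mono (fun j hj => by simp [hj]) h

theorem pv_conn_new_edge (L : List PVIntron) (i : PVIntron) :
    pvConn (L ++ [i]) i.1.1 i.1.2 :=
  Relation.EqvGen.rel _ _ ⟨i, by simp, Or.inl ⟨rfl, rfl⟩⟩

theorem pv_siteIn_append {L : List PVIntron} {i : PVIntron} {x : Int} :
    pvSiteIn (L ++ [i]) x ↔ pvSiteIn L x ∨ (i.1.1 = x ∨ i.1.2 = x) := by
  constructor
  · rintro ⟨j, hj, hor⟩
    rcases List.mem_append.mp hj with hj | hj
    · exact Or.inl ⟨j, hj, hor⟩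
    · rcases List.mem_singleton.mp hj with rfl
      exact Or.inr hor
  · rintro (⟨j, hj, hor⟩ | hor)
    · exact ⟨j, by simp [hj], hor⟩
    · exact ⟨i, by simp, hor⟩

-- ---------- S4b: small Dict helper lemmas for the analysis ----------

theorem pv_get?_foldl_insert_const : ∀ (bl : List Int) (comp : PySem.Dict Int Int)
    (a y : Int), (bl.foldl (fun c x => c.insert x a) comp).get? y =
      if y ∈ bl then some a else comp.get? y := by
  intro bl
  induction bl with
  | nil => intro comp a y; simp
  | cons x rest ih =>
    intro comp a y
    simp only [List.foldl_cons]
    rw [ih]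
    by_cases hy : y ∈ rest
    · rw [if_pos hy, if_pos (List.mem_cons_of_mem _ hy)]
    · rw [if_neg hy, PySem.Dict.get?_insert]
      by_cases hyx : y = x
      · rw [if_pos hyx, if_pos (by simp [hyx])]
      · rw [if_neg hyx, if_neg (by simp [hyx, hy])]

theorem pv_get?_erase (d : PySem.Dict Int (List Int)) (k c : Int) :
    (d.erase k).get? c = if c = k then none else d.get? c := by
  obtain ⟨items⟩ := d
  simp only [PySem.Dict.erase, PySem.Dict.get?]
  induction items with
  | nil => simp
  | cons p rest ih =>
    by_cases hpk : p.1 = k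
    · rw [List.filter_cons_of_neg (by simp [hpk])]
      rw [ih]
      by_cases hck : c = k
      · rw [if_pos hck, if_pos hck]
      · rw [if_neg hck, if_neg hck]
        have hf : List.find? (fun q => q.1 == c) (p :: rest) =
            List.find? (fun q => q.1 == c) rest :=
          List.find?_cons_of_neg (fun hc => hck ((beq_iff_eq.mp hc).symm.trans hpk))
        rw [hf]
    · rw [List.filter_cons_of_pos (by simp [hpk])]
      by_cases hpc : p.1 = c
      · rw [List.find?_cons_of_pos (by simp [hpc]), List.find?_cons_of_pos (by simp [hpc])]
        rw [if_neg (by rw [← hpc]; exact fun hc => hpk hc)]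
      · rw [List.find?_cons_of_neg (by simp [hpc]), List.find?_cons_of_neg (by simp [hpc]), ih]

theorem pv_values_eq_keys_map (d : PySem.Dict Int (List PVIntron)) (h : d.keys.Nodup) :
    d.values = d.keys.map (fun k => d.getD k []) := by
  obtain ⟨items⟩ := d
  induction items with
  | nil => simp
  | cons p rest ih =>
    rw [PySem.Dict.keys_mk, PySem.Dict.values_mk, List.map_cons, List.map_cons, List.map_cons]
    rw [PySem.Dict.keys_mk, List.map_cons] at h
    congr 1
    · simp [PySem.Dict.getD, PySem.Dict.get?]
    · have h2 := ih h.of_cons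
      rw [PySem.Dict.keys_mk, PySem.Dict.values_mk] at h2
      rw [h2]
      apply List.map_congr_left
      intro k hk
      have hne : ¬ (p.1 == k) = true := by
        simp only [beq_iff_eq]
        intro hc
        exact (List.nodup_cons.mp h).1 (hc ▸ hk)
      simp only [PySem.Dict.getD, PySem.Dict.get?]
      have hf : List.find? (fun q => q.1 == k) (p :: rest) =
          List.find? (fun q => q.1 == k) rest := List.find?_cons_of_neg hne
      rw [hf]


-- ---------- S5: the phase-1 component index is sound for connectivity ----------

def pvInvP (L : List PVIntron)
    (st : PySem.Dict Int Int × PySem.Dict Int (List Int) × Int) : Prop :=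
  (∀ x, (st.1.get? x).isSome ↔ pvSiteIn L x) ∧
  (∀ i ∈ L, st.1.get? i.1.1 = st.1.get? i.1.2) ∧
  (∀ x y c, st.1.get? x = some c → st.1.get? y = some c → pvConn L x y) ∧
  (∀ c x, x ∈ st.2.1.getD c [] ↔ st.1.get? x = some c) ∧
  (∀ x c, st.1.get? x = some c → c < st.2.2)

theorem pv_invP_nil : pvInvP [] (PySem.Dict.empty, PySem.Dict.empty, 0) := by
  refine ⟨?_, ?_, ?_, ?_, ?_⟩
  · intro x; simp [PySem.Dict.get?_empty, pvSiteIn]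
  · intro i hi; simp at hi
  · intro x y c hx; simp [PySem.Dict.get?_empty] at hx
  · intro c x; simp [PySem.Dict.getD_empty, PySem.Dict.get?_empty]
  · intro x c hx; simp [PySem.Dict.get?_empty] at hx

theorem pv_attach_inv (L : List PVIntron) (comp : PySem.Dict Int Int)
    (so : PySem.Dict Int (List Int)) (nid : Int)
    (hinv : pvInvP L (comp, so, nid)) (i : PVIntron) (xn xo ce : Int)
    (hx : (i.1.1 = xn ∧ i.1.2 = xo) ∨ (i.1.1 = xo ∧ i.1.2 = xn))
    (hn : comp.get? xn = none) (ho : comp.get? xo = some ce) :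
    pvInvP (L ++ [i]) (comp.insert xn ce, so.modify ce [] (· ++ [xn]), nid) := by
  obtain ⟨h1, h2, h3, h4, h5⟩ := hinv
  have hne : xn ≠ xo := by
    intro hc; rw [hc, ho] at hn; exact Option.some_ne_none _ hn
  have hg' : ∀ x, (comp.insert xn ce).get? x = if x = xn then some ce else comp.get? x := by
    intro x; rw [PySem.Dict.get?_insert]
  have hmem : ∀ x, (i.1.1 = x ∨ i.1.2 = x) ↔ (x = xn ∨ x = xo) := by
    rcases hx with ⟨ha, hb⟩ | ⟨ha, hb⟩ <;> intro x <;> constructor <;> rintro (h | h) <;> omega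
  have hconn_ne : pvConn (L ++ [i]) xn xo := by
    rcases hx with ⟨ha, hb⟩ | ⟨ha, hb⟩
    · exact ha ▸ hb ▸ pv_conn_new_edge L i
    · exact Relation.EqvGen.symm _ _ (ha ▸ hb ▸ pv_conn_new_edge L i)
  refine ⟨?_, ?_, ?_, ?_, ?_⟩
  · intro x
    rw [hg', pv_siteIn_append]
    by_cases hxx : x = xn
    · rw [if_pos hxx]
      simp only [Option.isSome_some, true_iff]
      exact Or.inr ((hmem x).mpr (Or.inl (by omega)))
    · rw [if_neg hxx, h1 x]
      constructor
      · exact Or.inl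
      · rintro (h | h)
        · exact h
        · have hxo : x = xo := by
            rcases (hmem x).mp h with h' | h'
            · exact absurd h' hxx
            · exact h'
          subst hxo
          exact (h1 x).mp (by rw [ho]; rfl)
  · intro j hj
    rcases List.mem_append.mp hj with hj | hj
    · have hs1 : (comp.get? j.1.1).isSome := (h1 _).mpr ⟨j, hj, Or.inl rfl⟩
      have hs2 : (comp.get? j.1.2).isSome := (h1 _).mpr ⟨j, hj, Or.inr rfl⟩
      have hj1 : j.1.1 ≠ xn := fun hc => by rw [hc, hn] at hs1; exact Bool.noConfusion hs1
      have hj2 : j.1.2 ≠ xn := fun hc => by rw [hc, hn] at hs2; exact Bool.noConfusion hs2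
      rw [hg', hg', if_neg hj1, if_neg hj2]
      exact h2 j hj
    · rcases List.mem_singleton.mp hj with rfl
      have hall : ∀ x, (j.1.1 = x ∨ j.1.2 = x) → (comp.insert xn ce).get? x = some ce := by
        intro x hx'
        rcases (hmem x).mp hx' with rfl | rfl
        · rw [hg', if_pos rfl]
        · rw [hg', if_neg (Ne.symm hne), ho]
      rw [hall j.1.1 (Or.inl rfl), hall j.1.2 (Or.inr rfl)]
  · intro x y c hgx hgy
    rw [hg'] at hgx hgy
    by_cases hxx : x = xn
    · rw [if_pos hxx] at hgx
      have hce : ce = c := Option.some_injective _ hgx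
      by_cases hyy : y = xn
      · rw [hxx, hyy]; exact Relation.EqvGen.refl _
      · rw [if_neg hyy] at hgy
        rw [hxx]
        exact Relation.EqvGen.trans _ _ _ hconn_ne
          (Relation.EqvGen.symm _ _ (pv_conn_append (h3 y xo c hgy (hce ▸ ho))))
    · rw [if_neg hxx] at hgx
      by_cases hyy : y = xn
      · rw [if_pos hyy] at hgy
        have hce : ce = c := Option.some_injective _ hgy
        rw [hyy]
        exact Relation.EqvGen.trans _ _ _ (pv_conn_append (h3 x xo c hgx (hce ▸ ho)))
          (Relation.EqvGen.symm _ _ hconn_ne)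
      · rw [if_neg hyy] at hgy
        exact pv_conn_append (h3 x y c hgx hgy)
  · intro c x
    rw [hg', PySem.Dict.getD_modify]
    by_cases hc : c = ce
    · subst hc
      rw [if_pos rfl]
      by_cases hxx : x = xn
      · simp [hxx]
      · rw [if_neg hxx, List.mem_append, List.mem_singleton, h4 c x]
        constructor
        · rintro (h | h)
          · exact h
          · exact absurd h hxx
        · exact Or.inl
    · rw [if_neg hc]
      by_cases hxx : x = xn
      · rw [if_pos hxx]
        constructor
        · intro hmem'
          have := (h4 c x).mp hmem'
          rw [hxx, hn] at this
          exact (Option.some_ne_none c this.symm).elim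
        · intro hsome
          exact absurd (Option.some_injective _ hsome).symm hc
      · rw [if_neg hxx]; exact h4 c x
  · intro x c hgx
    rw [hg'] at hgx
    by_cases hxx : x = xn
    · rw [if_pos hxx] at hgx
      rw [← (Option.some_injective _ hgx)]
      exact h5 xo ce ho
    · rw [if_neg hxx] at hgx
      exact h5 x c hgx


theorem pv_getD_erase (d : PySem.Dict Int (List Int)) (k c : Int) :
    (d.erase k).getD c [] = if c = k then [] else d.getD c [] := by
  simp only [PySem.Dict.getD, pv_get?_erase]
  by_cases h : c = k <;> simp [h]

theorem pv_merge_inv (L : List PVIntron) (comp : PySem.Dict Int Int)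
    (so : PySem.Dict Int (List Int)) (nid : Int)
    (hinv : pvInvP L (comp, so, nid)) (i : PVIntron) (a b : Int) (hab : a ≠ b)
    (hor : (comp.get? i.1.1 = some a ∧ comp.get? i.1.2 = some b) ∨
           (comp.get? i.1.1 = some b ∧ comp.get? i.1.2 = some a)) :
    pvInvP (L ++ [i]) ((so.getD b []).foldl (fun c x => c.insert x a) comp,
      (so.modify a [] (· ++ so.getD b [])).erase b, nid) := by
  obtain ⟨h1, h2, h3, h4, h5⟩ := hinv
  obtain ⟨ps, pe, hpa, hpb, hpc⟩ : ∃ ps pe, comp.get? ps = some a ∧ comp.get? pe = some b ∧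
      pvConn (L ++ [i]) ps pe := by
    rcases hor with ⟨ha', hb'⟩ | ⟨ha', hb'⟩
    · exact ⟨i.1.1, i.1.2, ha', hb', pv_conn_new_edge L i⟩
    · exact ⟨i.1.2, i.1.1, hb', ha', Relation.EqvGen.symm _ _ (pv_conn_new_edge L i)⟩
  have hg' : ∀ x, ((so.getD b []).foldl (fun c x => c.insert x a) comp).get? x =
      if comp.get? x = some b then some a else comp.get? x := by
    intro x
    rw [pv_get?_foldl_insert_const]
    by_cases hx : comp.get? x = some b
    · rw [if_pos ((h4 b x).mpr hx), if_pos hx]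
    · rw [if_neg (fun hc => hx ((h4 b x).mp hc)), if_neg hx]
  have hso' : ∀ c, ((so.modify a [] (· ++ so.getD b [])).erase b).getD c [] =
      if c = b then [] else if c = a then so.getD a [] ++ so.getD b [] else so.getD c [] := by
    intro c
    rw [pv_getD_erase, PySem.Dict.getD_modify]
  refine ⟨?_, ?_, ?_, ?_, ?_⟩
  · intro x
    rw [hg', pv_siteIn_append]
    by_cases hx : comp.get? x = some b
    · rw [if_pos hx]
      simp only [Option.isSome_some, true_iff]
      exact Or.inl ((h1 x).mp (by rw [hx]; rfl))
    · rw [if_neg hx, h1 x]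
      constructor
      · exact Or.inl
      · rintro (h | h)
        · exact h
        · rcases hor with ⟨ha', hb'⟩ | ⟨ha', hb'⟩ <;> rcases h with h | h <;>
            [exact (h1 x).mp (by rw [← h, ha']; rfl);
             exact (h1 x).mp (by rw [← h, hb']; rfl);
             exact (h1 x).mp (by rw [← h, ha']; rfl);
             exact (h1 x).mp (by rw [← h, hb']; rfl)]
  · intro j hj
    rcases List.mem_append.mp hj with hj | hj
    · rw [hg', hg', h2 j hj]
    · rcases List.mem_singleton.mp hj with rfl
      rw [hg', hg']
      rcases hor with ⟨ha', hb'⟩ | ⟨ha', hb'⟩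
      · rw [ha', hb', if_neg (fun hc => hab (Option.some_injective _ hc)), if_pos rfl]
      · rw [ha', hb', if_pos rfl, if_neg (fun hc => hab (Option.some_injective _ hc))]
  · intro x y c hgx hgy
    rw [hg'] at hgx hgy
    by_cases hx : comp.get? x = some b <;> by_cases hy : comp.get? y = some b
    · rw [if_pos hx] at hgx
      rw [if_pos hy] at hgy
      exact pv_conn_append (h3 x y b hx hy)
    · rw [if_pos hx] at hgx
      rw [if_neg hy] at hgy
      have hca : a = c := Option.some_injective _ hgx
      refine Relation.EqvGen.trans _ _ _ (pv_conn_append (h3 x pe b hx hpb)) ?_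
      refine Relation.EqvGen.trans _ _ _ (Relation.EqvGen.symm _ _ hpc) ?_
      exact pv_conn_append (h3 ps y c (hca ▸ hpa) hgy)
    · rw [if_neg hx] at hgx
      rw [if_pos hy] at hgy
      have hca : a = c := Option.some_injective _ hgy
      refine Relation.EqvGen.trans _ _ _ (pv_conn_append (h3 x ps c hgx (hca ▸ hpa))) ?_
      refine Relation.EqvGen.trans _ _ _ hpc ?_
      exact Relation.EqvGen.symm _ _ (pv_conn_append (h3 y pe b hy hpb))
    · rw [if_neg hx] at hgx
      rw [if_neg hy] at hgy
      exact pv_conn_append (h3 x y c hgx hgy)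
  · intro c x
    rw [hg', hso']
    by_cases hcb : c = b
    · subst hcb
      rw [if_pos rfl]
      simp only [List.not_mem_nil, false_iff]
      by_cases hx : comp.get? x = some c
      · rw [if_pos hx]
        exact fun hc => hab (Option.some_injective _ hc)
      · rw [if_neg hx]
        exact hx
    · rw [if_neg hcb]
      by_cases hca : c = a
      · subst hca
        rw [if_pos rfl, List.mem_append, h4 c x, h4 b x]
        by_cases hx : comp.get? x = some b
        · rw [if_pos hx]
          constructor
          · intro _; rfl
          · intro _; exact Or.inr hx
        · rw [if_neg hx]
          constructor
          · rintro (h | h)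
            · exact h
            · exact absurd h hx
          · exact Or.inl
      · rw [if_neg hca, h4 c x]
        by_cases hx : comp.get? x = some b
        · rw [if_pos hx]
          constructor
          · intro h; rw [hx] at h; exact absurd (Option.some_injective _ h) (fun hc => hcb hc.symm)
          · intro h; exact absurd (Option.some_injective _ h) (fun hc => hca hc.symm)
        · rw [if_neg hx]
  · intro x c hgx
    rw [hg'] at hgx
    by_cases hx : comp.get? x = some b
    · rw [if_pos hx] at hgx
      rw [← Option.some_injective _ hgx]
      exact h5 ps a hpa
    · rw [if_neg hx] at hgx
      exact h5 x c hgx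


theorem pv_fresh_inv (L : List PVIntron) (comp : PySem.Dict Int Int)
    (so : PySem.Dict Int (List Int)) (nid : Int)
    (hinv : pvInvP L (comp, so, nid)) (i : PVIntron)
    (hs : comp.get? i.1.1 = none) (he : comp.get? i.1.2 = none) :
    pvInvP (L ++ [i]) ((comp.insert i.1.1 nid).insert i.1.2 nid,
      so.insert nid (if i.1.1 = i.1.2 then [i.1.1] else [i.1.1, i.1.2]), nid + 1) := by
  obtain ⟨h1, h2, h3, h4, h5⟩ := hinv
  have hg' : ∀ x, ((comp.insert i.1.1 nid).insert i.1.2 nid).get? x =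
      if x = i.1.2 then some nid else if x = i.1.1 then some nid else comp.get? x := by
    intro x; rw [PySem.Dict.get?_insert, PySem.Dict.get?_insert]
  have hnotold : ∀ x, x ≠ i.1.1 → x ≠ i.1.2 → comp.get? x = some nid → False := by
    intro x _ _ hx; exact lt_irrefl nid (h5 x nid hx)
  refine ⟨?_, ?_, ?_, ?_, ?_⟩
  · intro x
    rw [hg', pv_siteIn_append]
    by_cases h2' : x = i.1.2
    · rw [if_pos h2']; simp only [Option.isSome_some, true_iff]
      exact Or.inr (Or.inr h2'.symm)
    · rw [if_neg h2']
      by_cases h1' : x = i.1.1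
      · rw [if_pos h1']; simp only [Option.isSome_some, true_iff]
        exact Or.inr (Or.inl h1'.symm)
      · rw [if_neg h1', h1 x]
        constructor
        · exact Or.inl
        · rintro (h | h | h)
          · exact h
          · exact absurd h.symm h1'
          · exact absurd h.symm h2'
  · intro j hj
    rcases List.mem_append.mp hj with hj | hj
    · have hs1 : (comp.get? j.1.1).isSome := (h1 _).mpr ⟨j, hj, Or.inl rfl⟩
      have hs2 : (comp.get? j.1.2).isSome := (h1 _).mpr ⟨j, hj, Or.inr rfl⟩
      have e1 : j.1.1 ≠ i.1.1 := fun hc => by rw [hc, hs] at hs1; exact Bool.noConfusion hs1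
      have e2 : j.1.1 ≠ i.1.2 := fun hc => by rw [hc, he] at hs1; exact Bool.noConfusion hs1
      have e3 : j.1.2 ≠ i.1.1 := fun hc => by rw [hc, hs] at hs2; exact Bool.noConfusion hs2
      have e4 : j.1.2 ≠ i.1.2 := fun hc => by rw [hc, he] at hs2; exact Bool.noConfusion hs2
      rw [hg', hg', if_neg e2, if_neg e1, if_neg e4, if_neg e3]
      exact h2 j hj
    · rcases List.mem_singleton.mp hj with rfl
      rw [hg', hg']
      by_cases hse : j.1.1 = j.1.2 <;> simp [hse]
  · intro x y c hgx hgy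
    rw [hg'] at hgx hgy
    have hnew : ∀ z, (z = i.1.2 ∨ z = i.1.1) → pvConn (L ++ [i]) i.1.1 z := by
      rintro z (rfl | rfl)
      · exact pv_conn_new_edge L i
      · exact Relation.EqvGen.refl _
    have hval : ∀ z, (z = i.1.2 ∨ z = i.1.1) →
        (if z = i.1.2 then some nid else if z = i.1.1 then some nid else comp.get? z) =
          some nid := by
      intro z hz
      by_cases h2' : z = i.1.2
      · rw [if_pos h2']
      · rw [if_neg h2', if_pos (by omega)]
    by_cases hx : x = i.1.2 ∨ x = i.1.1 <;> by_cases hy : y = i.1.2 ∨ y = i.1.1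
    · exact Relation.EqvGen.trans _ _ _ (Relation.EqvGen.symm _ _ (hnew x hx)) (hnew y hy)
    · exfalso
      push Not at hy
      rw [if_neg hy.1, if_neg hy.2] at hgy
      rw [hval x hx] at hgx
      have hc : c = nid := (Option.some_injective _ hgx).symm
      exact hnotold y hy.2 hy.1 (by rw [hgy, hc])
    · exfalso
      push Not at hx
      rw [if_neg hx.1, if_neg hx.2] at hgx
      rw [hval y hy] at hgy
      have hc : c = nid := (Option.some_injective _ hgy).symm
      exact hnotold x hx.2 hx.1 (by rw [hgx, hc])
    · push Not at hx
      push Not at hy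
      rw [if_neg hx.1, if_neg hx.2] at hgx
      rw [if_neg hy.1, if_neg hy.2] at hgy
      exact pv_conn_append (h3 x y c hgx hgy)
  · intro c x
    rw [hg', PySem.Dict.getD_insert]
    by_cases hc : c = nid
    · rw [if_pos hc]
      constructor
      · intro hmem'
        have hx : x = i.1.1 ∨ x = i.1.2 := by
          by_cases hse : i.1.1 = i.1.2
          · rw [if_pos hse] at hmem'; simp at hmem'; exact Or.inl hmem'
          · rw [if_neg hse] at hmem'; simpa using hmem'
        rcases hx with rfl | rfl
        · by_cases hse : i.1.1 = i.1.2 <;> simp [hse, hc]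
        · simp [hc]
      · intro hsome
        by_cases hx2 : x = i.1.2
        · by_cases hse : i.1.1 = i.1.2 <;> simp [hse, hx2]
        · rw [if_neg hx2] at hsome
          by_cases hx1 : x = i.1.1
          · by_cases hse : i.1.1 = i.1.2 <;> simp [hse, hx1]
          · rw [if_neg hx1] at hsome
            exact absurd (show comp.get? x = some nid by rw [hsome, hc])
              (fun hcc => hnotold x hx1 hx2 hcc)
    · rw [if_neg hc, h4 c x]
      constructor
      · intro hold
        have hx1 : x ≠ i.1.1 := fun hc' => by rw [hc', hs] at hold; cases hold
        have hx2 : x ≠ i.1.2 := fun hc' => by rw [hc', he] at hold; cases hold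
        rw [if_neg hx2, if_neg hx1]; exact hold
      · intro hnew'
        by_cases hx2 : x = i.1.2
        · rw [if_pos hx2] at hnew'
          exact absurd (Option.some_injective _ hnew').symm hc
        · rw [if_neg hx2] at hnew'
          by_cases hx1 : x = i.1.1
          · rw [if_pos hx1] at hnew'
            exact absurd (Option.some_injective _ hnew').symm hc
          · rw [if_neg hx1] at hnew'; exact hnew'
  · intro x c hgx
    rw [hg'] at hgx
    show c < nid + 1
    by_cases hx2 : x = i.1.2
    · rw [if_pos hx2] at hgx
      have := (Option.some_injective _ hgx)
      omega
    · rw [if_neg hx2] at hgx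
      by_cases hx1 : x = i.1.1
      · rw [if_pos hx1] at hgx
        have := (Option.some_injective _ hgx)
        omega
      · rw [if_neg hx1] at hgx
        have := h5 x c hgx
        simp only at this
        omega


theorem pv_stay_inv (L : List PVIntron) (comp : PySem.Dict Int Int)
    (so : PySem.Dict Int (List Int)) (nid : Int)
    (hinv : pvInvP L (comp, so, nid)) (i : PVIntron) (c : Int)
    (hs : comp.get? i.1.1 = some c) (he : comp.get? i.1.2 = some c) :
    pvInvP (L ++ [i]) (comp, so, nid) := by
  obtain ⟨h1, h2, h3, h4, h5⟩ := hinv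
  refine ⟨?_, ?_, ?_, h4, h5⟩
  · intro x
    rw [pv_siteIn_append, h1 x]
    constructor
    · exact Or.inl
    · rintro (h | h | h)
      · exact h
      · exact (h1 x).mp (by rw [← h, hs]; rfl)
      · exact (h1 x).mp (by rw [← h, he]; rfl)
  · intro j hj
    rcases List.mem_append.mp hj with hj | hj
    · exact h2 j hj
    · rcases List.mem_singleton.mp hj with rfl
      rw [hs, he]
  · intro x y cc hx hy
    exact pv_conn_append (h3 x y cc hx hy)

theorem pv_step_inv (L : List PVIntron)
    (st : PySem.Dict Int Int × PySem.Dict Int (List Int) × Int)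
    (hinv : pvInvP L st) (i : PVIntron) : pvInvP (L ++ [i]) (bUnionStep st i) := by
  obtain ⟨comp, so, nid⟩ := st
  cases hs : comp.get? i.1.1 with
  | none =>
    cases he : comp.get? i.1.2 with
    | none =>
      simp only [bUnionStep, hs, he]
      exact pv_fresh_inv L comp so nid hinv i hs he
    | some ce =>
      simp only [bUnionStep, hs, he]
      exact pv_attach_inv L comp so nid hinv i i.1.1 i.1.2 ce (Or.inl ⟨rfl, rfl⟩) hs he
  | some cs =>
    cases he : comp.get? i.1.2 with
    | none =>
      simp only [bUnionStep, hs, he]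
      exact pv_attach_inv L comp so nid hinv i i.1.2 i.1.1 cs (Or.inr ⟨rfl, rfl⟩) he hs
    | some ce =>
      simp only [bUnionStep, hs, he]
      by_cases hcc : cs = ce
      · rw [if_pos hcc]
        exact pv_stay_inv L comp so nid hinv i ce (hcc ▸ hs) he
      · rw [if_neg hcc]
        by_cases hlen : (so.getD cs []).length ≥ (so.getD ce []).length
        · rw [if_pos hlen]
          exact pv_merge_inv L comp so nid hinv i cs ce hcc (Or.inl ⟨hs, he⟩)
        · rw [if_neg hlen]
          exact pv_merge_inv L comp so nid hinv i ce cs (fun hc => hcc hc.symm)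
            (Or.inr ⟨hs, he⟩)

theorem pv_fold_inv : ∀ (M L : List PVIntron)
    (st : PySem.Dict Int Int × PySem.Dict Int (List Int) × Int),
    pvInvP L st → pvInvP (L ++ M) (M.foldl bUnionStep st) := by
  intro M
  induction M with
  | nil => intro L st h; simpa using h
  | cons i M ih =>
    intro L st h
    rw [List.foldl_cons, show L ++ i :: M = (L ++ [i]) ++ M by simp]
    exact ih (L ++ [i]) (bUnionStep st i) (pv_step_inv L st h i)

theorem pv_comp_inv (clusters : List PVIntron) :
    pvInvP clusters (clusters.foldl bUnionStep (PySem.Dict.empty, PySem.Dict.empty, 0)) := by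
  have := pv_fold_inv clusters [] (PySem.Dict.empty, PySem.Dict.empty, 0) pv_invP_nil
  simpa using this

theorem pv_C_dom (clusters : List PVIntron) (x : Int) :
    ((bComp clusters).get? x).isSome ↔ pvSiteIn clusters x :=
  (pv_comp_inv clusters).1 x

theorem pv_C_ends (clusters : List PVIntron) : ∀ i ∈ clusters,
    (bComp clusters).get? i.1.1 = (bComp clusters).get? i.1.2 :=
  (pv_comp_inv clusters).2.1

theorem pv_C_conn (clusters : List PVIntron) (x y c : Int)
    (hx : (bComp clusters).get? x = some c) (hy : (bComp clusters).get? y = some c) :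
    pvConn clusters x y :=
  (pv_comp_inv clusters).2.2.1 x y c hx hy


-- ---------- S6: a pass ignores introns of other components ----------

def pvM (C : PySem.Dict Int Int) (c : Int) (i : PVIntron) : Bool :=
  decide (C.get? i.1.1 = some c)

def pvPure (C : PySem.Dict Int Int) (c : Int) (ss : PySem.Set Int) : Prop :=
  ∀ x ∈ ss, C.get? x = some c

theorem pv_touch_mem {C : PySem.Dict Int Int} {c : Int} {ss : PySem.Set Int}
    (hP : pvPure C c ss) {i : PVIntron} (hE : C.get? i.1.1 = C.get? i.1.2)
    (h : (PySem.Set.contains ss i.1.1 || PySem.Set.contains ss i.1.2) = true) :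
    C.get? i.1.1 = some c := by
  rcases Bool.or_eq_true_iff.mp h with h | h
  · exact hP _ ((PySem.Set.contains_iff ss i.1.1).mp h)
  · rw [hE]; exact hP _ ((PySem.Set.contains_iff ss i.1.2).mp h)

theorem pv_add2_pure {C : PySem.Dict Int Int} {c : Int} {ss : PySem.Set Int}
    (hP : pvPure C c ss) {i : PVIntron} (h1 : C.get? i.1.1 = some c)
    (h2 : C.get? i.1.2 = some c) :
    pvPure C c (PySem.Set.add (PySem.Set.add ss i.1.1) i.1.2) := by
  intro x hx
  rcases (PySem.Set.mem_add _ _ _).mp hx with hx | rfl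
  · rcases (PySem.Set.mem_add _ _ _).mp hx with hx | rfl
    · exact hP x hx
    · exact h1
  · exact h2

theorem pv_bPass_filter (C : PySem.Dict Int Int) (c : Int) : ∀ (u cl : List PVIntron)
    (ss : PySem.Set Int) (torm : List PVIntron), pvPure C c ss →
    (∀ i ∈ u, C.get? i.1.1 = C.get? i.1.2) →
    bPass u cl ss torm = bPass (u.filter (pvM C c)) cl ss torm := by
  intro u
  induction u with
  | nil => intro cl ss torm _ _; rfl
  | cons i rest ih =>
    intro cl ss torm hP hE
    by_cases hm : pvM C c i = true
    · rw [List.filter_cons_of_pos hm]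
      by_cases ht : (PySem.Set.contains ss i.1.1 || PySem.Set.contains ss i.1.2) = true
      · rw [pv_bPass_cons_pos ht, pv_bPass_cons_pos ht]
        refine ih _ _ _ (pv_add2_pure hP (of_decide_eq_true hm) ?_)
          (fun j hj => hE j (List.mem_cons_of_mem _ hj))
        rw [← hE i List.mem_cons_self]; exact of_decide_eq_true hm
      · rw [pv_bPass_cons_neg ht, pv_bPass_cons_neg ht]
        exact ih _ _ _ hP (fun j hj => hE j (List.mem_cons_of_mem _ hj))
    · rw [List.filter_cons_of_neg hm]
      have ht : ¬ (PySem.Set.contains ss i.1.1 || PySem.Set.contains ss i.1.2) = true := by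
        intro hc
        exact hm (decide_eq_true (pv_touch_mem hP (hE i List.mem_cons_self) hc))
      rw [pv_bPass_cons_neg ht]
      exact ih _ _ _ hP (fun j hj => hE j (List.mem_cons_of_mem _ hj))

theorem pv_bPass_pure (C : PySem.Dict Int Int) (c : Int) : ∀ (u cl : List PVIntron)
    (ss : PySem.Set Int) (torm : List PVIntron), pvPure C c ss →
    (∀ i ∈ u, C.get? i.1.1 = C.get? i.1.2) →
    pvPure C c (bPass u cl ss torm).2.1 := by
  intro u
  induction u with
  | nil => intro cl ss torm hP _; exact hP
  | cons i rest ih =>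
    intro cl ss torm hP hE
    by_cases ht : (PySem.Set.contains ss i.1.1 || PySem.Set.contains ss i.1.2) = true
    · rw [pv_bPass_cons_pos ht]
      have h1 := pv_touch_mem hP (hE i List.mem_cons_self) ht
      exact ih _ _ _ (pv_add2_pure hP h1 ((hE i List.mem_cons_self) ▸ h1))
        (fun j hj => hE j (List.mem_cons_of_mem _ hj))
    · rw [pv_bPass_cons_neg ht]
      exact ih _ _ _ hP (fun j hj => hE j (List.mem_cons_of_mem _ hj))

theorem pv_bPass_torm_mem (C : PySem.Dict Int Int) (c : Int) : ∀ (u cl : List PVIntron)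
    (ss : PySem.Set Int) (torm : List PVIntron), pvPure C c ss →
    (∀ i ∈ u, C.get? i.1.1 = C.get? i.1.2) →
    ∀ j ∈ (bPass u cl ss torm).2.2, j ∈ torm ∨ pvM C c j = true := by
  intro u
  induction u with
  | nil => intro cl ss torm _ _ j hj; exact Or.inl hj
  | cons i rest ih =>
    intro cl ss torm hP hE j hj
    by_cases ht : (PySem.Set.contains ss i.1.1 || PySem.Set.contains ss i.1.2) = true
    · rw [pv_bPass_cons_pos ht] at hj
      have h1 := pv_touch_mem hP (hE i List.mem_cons_self) ht
      rcases ih _ _ _ (pv_add2_pure hP h1 ((hE i List.mem_cons_self) ▸ h1))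
        (fun k hk => hE k (List.mem_cons_of_mem _ hk)) j hj with h | h
      · rcases List.mem_append.mp h with h | h
        · exact Or.inl h
        · rcases List.mem_singleton.mp h with rfl
          exact Or.inr (decide_eq_true h1)
      · exact Or.inr h
    · rw [pv_bPass_cons_neg ht] at hj
      exact ih _ _ _ hP (fun k hk => hE k (List.mem_cons_of_mem _ hk)) j hj

theorem pv_bPass_nopick : ∀ (u cl : List PVIntron) (ss : PySem.Set Int),
    (bPass u cl ss []).2.2 = [] →
    ∀ i ∈ u, (PySem.Set.contains ss i.1.1 || PySem.Set.contains ss i.1.2) = false := by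
  intro u
  induction u with
  | nil => intro cl ss _ i hi; exact absurd hi (List.not_mem_nil)
  | cons i rest ih =>
    intro cl ss hnil j hj
    by_cases ht : (PySem.Set.contains ss i.1.1 || PySem.Set.contains ss i.1.2) = true
    · exfalso
      rw [pv_bPass_cons_pos ht] at hnil
      obtain ⟨d, _, h2, _, _, _⟩ := pv_bPass_shape rest (cl ++ [i])
        (PySem.Set.add (PySem.Set.add ss i.1.1) i.1.2) ([] ++ [i])
      rw [h2] at hnil
      simp at hnil
    · rw [pv_bPass_cons_neg ht] at hnil
      rcases List.mem_cons.mp hj with rfl | hj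
      · exact Bool.not_eq_true _ ▸ (by simpa using ht)
      · exact ih _ _ hnil j hj

theorem pv_pvRF_filter (p : PVIntron → Bool) {v : PVIntron} (hv : p v = true)
    (u : List PVIntron) :
    (pvRF u v).filter p = pvRF (u.filter p) v ∧
    (pvRF u v).filter (fun i => !p i) = u.filter (fun i => !p i) := by
  by_cases h : v ∈ u
  · rw [pv_pvRF_of_mem h, pv_pvRF_of_mem (List.mem_filter.mpr ⟨h, hv⟩)]
    constructor
    · exact (List.erase_filter).symm
    · rw [← List.erase_filter]
      exact List.erase_of_not_mem (fun hc => by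
        have := (List.mem_filter.mp hc).2
        rw [hv] at this; exact Bool.noConfusion this)
  · rw [pv_pvRF_of_not_mem h,
      pv_pvRF_of_not_mem (fun hc => h (List.mem_filter.mp hc).1)]
    exact ⟨rfl, rfl⟩

theorem pv_aRemove_filter (p : PVIntron → Bool) : ∀ (t : List PVIntron),
    (∀ v ∈ t, p v = true) → ∀ u,
    (aRemove u t).filter p = aRemove (u.filter p) t ∧
    (aRemove u t).filter (fun i => !p i) = u.filter (fun i => !p i) := by
  intro t
  induction t with
  | nil => intro _ u; exact ⟨rfl, rfl⟩
  | cons v ts ih =>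
    intro hall u
    rw [pv_aRemove_cons, pv_aRemove_cons]
    have h1 := pv_pvRF_filter p (hall v List.mem_cons_self) u
    have h2 := ih (fun w hw => hall w (List.mem_cons_of_mem _ hw)) (pvRF u v)
    refine ⟨?_, h2.2.trans h1.2⟩
    rw [h2.1, h1.1]


theorem pv_filter_not_of_filter_nil {l : List PVIntron} {p : PVIntron → Bool}
    (h : l.filter p = []) : l = l.filter (fun i => !p i) := by
  induction l with
  | nil => rfl
  | cons x l ih =>
    by_cases hx : p x = true
    · rw [List.filter_cons_of_pos hx] at h; exact absurd h (List.cons_ne_nil _ _)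
    · rw [List.filter_cons_of_neg hx] at h
      rw [List.filter_cons_of_pos (by simp [hx]), ← ih h]

theorem pv_split (C : PySem.Dict Int Int) (c : Int) : ∀ (n : Nat) (u cl : List PVIntron)
    (ss : PySem.Set Int), u.length ≤ n → pvPure C c ss →
    (∀ i ∈ u, C.get? i.1.1 = C.get? i.1.2) →
    (pvExpandW cl ss u).1 = (pvExpandW cl ss (u.filter (pvM C c))).1 ∧
    (pvExpandW cl ss u).2.filter (pvM C c) = (pvExpandW cl ss (u.filter (pvM C c))).2 ∧
    (pvExpandW cl ss u).2.filter (fun i => !(pvM C c i)) =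
      u.filter (fun i => !(pvM C c i)) := by
  intro n
  induction n with
  | zero =>
    intro u cl ss hlen _ _
    have hu : u = [] := List.length_eq_zero_iff.mp (Nat.le_zero.mp hlen)
    subst hu
    simp [pvExpandW_nil]
  | succ m ih =>
    intro u cl ss hlen hP hE
    have hpass := pv_bPass_filter C c u cl ss [] hP hE
    rw [pvExpandW_eq cl ss u, pvExpandW_eq cl ss (u.filter (pvM C c)), ← hpass]
    by_cases hnil : (bPass u cl ss []).2.2 = []
    · rw [dif_pos hnil, dif_pos hnil]
      exact ⟨rfl, rfl, rfl⟩
    · rw [dif_neg hnil, dif_neg hnil]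
      have htm : ∀ j ∈ (bPass u cl ss []).2.2, pvM C c j = true := by
        intro j hj
        rcases pv_bPass_torm_mem C c u cl ss [] hP hE j hj with h | h
        · exact absurd h (List.not_mem_nil)
        · exact h
      have hrm := pv_aRemove_filter (pvM C c) (bPass u cl ss []).2.2 htm u
      rw [← hrm.1]
      obtain ⟨d, _, h2, h3, _, _⟩ := pv_bPass_shape u cl ss []
      simp only [List.nil_append] at h2
      have hlt := pv_aRemove_lt (t := (bPass u cl ss []).2.2) (u := u)
        hnil (by rw [h2]; exact h3)
      obtain ⟨c1, c2, c3⟩ := ih (aRemove u (bPass u cl ss []).2.2) (bPass u cl ss []).1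
        (bPass u cl ss []).2.1 (by omega) (pv_bPass_pure C c u cl ss [] hP hE)
        (fun i hi => hE i (pv_aRemove_subset _ _ i hi))
      exact ⟨c1, c2, c3.trans hrm.2⟩

theorem pv_fix (clusters : List PVIntron) (c : Int) : ∀ (n : Nat) (u cl : List PVIntron)
    (ss : PySem.Set Int), u.length ≤ n →
    pvPure (bComp clusters) c ss →
    (∀ i ∈ u, (bComp clusters).get? i.1.1 = some c) →
    (∀ i ∈ u, i ∈ clusters) →
    (∀ i, i ∈ clusters → (bComp clusters).get? i.1.1 = some c → (i ∈ cl ∨ i ∈ u)) →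
    (∀ i ∈ cl, i.1.1 ∈ ss ∧ i.1.2 ∈ ss) →
    (∃ a, a ∈ ss) →
    (pvExpandW cl ss u).2 = [] := by
  intro n
  induction n with
  | zero =>
    intro u cl ss hlen _ _ _ _ _ _
    have hu : u = [] := List.length_eq_zero_iff.mp (Nat.le_zero.mp hlen)
    subst hu
    rw [pvExpandW_nil]
  | succ m ih =>
    intro u cl ss hlen hP hu hinC hCTX hV2 hNE
    rw [pvExpandW_eq cl ss u]
    by_cases hnil : (bPass u cl ss []).2.2 = []
    · rw [dif_pos hnil]
      show u = []
      cases hu' : u with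
      | nil => rfl
      | cons x u' =>
        exfalso
        subst hu'
        have hnopick := pv_bPass_nopick _ cl ss hnil
        obtain ⟨a0, ha0⟩ := hNE
        have hchain : ∀ p q, pvConn clusters p q → (p ∈ ss ↔ q ∈ ss) := by
          intro p q hconn
          induction hconn with
          | rel a b hab =>
            obtain ⟨j, hjL, hor⟩ := hab
            have key : ∀ z w, ((j.1.1 = z ∧ j.1.2 = w) ∨ (j.1.1 = w ∧ j.1.2 = z)) →
                z ∈ ss → w ∈ ss := by
              intro z w hzw hz
              have hcz : (bComp clusters).get? z = some c := hP _ hz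
              have hj1 : (bComp clusters).get? j.1.1 = some c := by
                rcases hzw with ⟨hz1, _⟩ | ⟨_, hz2⟩
                · rw [hz1]; exact hcz
                · rw [pv_C_ends clusters j hjL, hz2]; exact hcz
              rcases hCTX j hjL hj1 with hjcl | hju
              · obtain ⟨hin1, hin2⟩ := hV2 j hjcl
                rcases hzw with ⟨_, hw⟩ | ⟨hw, _⟩
                · exact hw ▸ hin2
                · exact hw ▸ hin1
              · exfalso
                have hfalse := hnopick j hju
                have : PySem.Set.contains ss z = true := (PySem.Set.contains_iff ss z).mpr hz
                rcases hzw with ⟨hz1, _⟩ | ⟨_, hz2⟩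
                · rw [← hz1] at this; rw [this] at hfalse; simp at hfalse
                · rw [← hz2] at this; rw [this] at hfalse; simp at hfalse
            constructor
            · exact key a b hor
            · refine key b a ?_
              rcases hor with h | h
              · exact Or.inr h
              · exact Or.inl h
          | refl a => exact Iff.rfl
          | symm a b _ ihh => exact ihh.symm
          | trans a b cc _ _ ih1 ih2 => exact ih1.trans ih2
        have hx1 : x.1.1 ∈ ss := by
          refine (hchain a0 x.1.1 ?_).mp ha0
          exact pv_C_conn clusters a0 x.1.1 c (hP _ ha0) (hu x List.mem_cons_self)
        have := hnopick x List.mem_cons_self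
        rw [(PySem.Set.contains_iff ss x.1.1).mpr hx1] at this
        simp at this
    · rw [dif_neg hnil]
      obtain ⟨d, hcl', h2, h3, hmono, hdend⟩ := pv_bPass_shape u cl ss []
      simp only [List.nil_append] at h2 hcl'
      have hlt := pv_aRemove_lt (t := (bPass u cl ss []).2.2) (u := u)
        hnil (by rw [h2]; exact h3)
      refine ih (aRemove u (bPass u cl ss []).2.2) (bPass u cl ss []).1
        (bPass u cl ss []).2.1 (by omega)
        (pv_bPass_pure (bComp clusters) c u cl ss [] hP
          (fun i hi => pv_C_ends clusters i (hinC i hi)))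
        (fun i hi => hu i (pv_aRemove_subset _ _ i hi))
        (fun i hi => hinC i (pv_aRemove_subset _ _ i hi))
        ?_ ?_ ?_
      · intro i hiL hic
        rcases hCTX i hiL hic with hcl | hiu
        · left; rw [hcl']; exact List.mem_append_left _ hcl
        · by_cases hrem : i ∈ aRemove u (bPass u cl ss []).2.2
          · exact Or.inr hrem
          · left
            rw [hcl']
            refine List.mem_append_right _ ?_
            have := pv_aRemove_mem (bPass u cl ss []).2.2 u i hiu hrem
            rw [h2] at this; exact this
      · intro j hj
        rw [hcl'] at hj
        rcases List.mem_append.mp hj with hj | hj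
        · obtain ⟨e1, e2⟩ := hV2 j hj
          exact ⟨hmono _ e1, hmono _ e2⟩
        · exact hdend j hj
      · obtain ⟨a0, ha0⟩ := hNE
        exact ⟨a0, hmono _ ha0⟩


-- ---------- S7: bucket structure of phase 2 ----------

theorem pv_filter_swap {α : Type} (p q : α → Bool) (l : List α) :
    (l.filter q).filter p = (l.filter p).filter q := by
  rw [List.filter_filter, List.filter_filter]
  exact List.filter_congr (fun a _ => by rw [Bool.and_comm])

theorem pv_filter_ofList (p : Int → Bool) : ∀ (l : List Int),
    (PySem.Set.ofList l).filter p = PySem.Set.ofList (l.filter p) := by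
  intro l
  induction l with
  | nil => rfl
  | cons x l ih =>
    rw [PySem.Set.ofList_cons]
    by_cases hx : p x = true
    · rw [List.filter_cons_of_pos hx, List.filter_cons_of_pos hx, PySem.Set.ofList_cons, ← ih]
      simp only [PySem.Set.discard]
      exact congrArg (x :: ·) (pv_filter_swap _ _ _)
    · rw [List.filter_cons_of_neg hx, List.filter_cons_of_neg hx, ← ih]
      simp only [PySem.Set.discard]
      rw [List.filter_filter]
      refine List.filter_congr (fun a _ => ?_)
      by_cases hax : a = x
      · subst hax
        simp [hx]
      · simp [hax]

theorem pv_ofList_cons (x : Int) (l : List Int) :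
    PySem.Set.ofList (x :: l) = x :: PySem.Set.ofList (l.filter (fun y => !(y == x))) := by
  rw [PySem.Set.ofList_cons, ← pv_filter_ofList]
  rfl

def pvKey (C : PySem.Dict Int Int) (i : PVIntron) : Int := C.getD i.1.1 0

theorem pv_buckets_getD (L : List PVIntron) (C : PySem.Dict Int Int) (c : Int) :
    (bBuckets L C).getD c [] = L.filter (fun i => pvKey C i == c) := by
  unfold bBuckets
  rw [show (L.foldl (fun d i => d.modify (C.getD i.1.1 0) [] (· ++ [i])) PySem.Dict.empty)
      = ((L.map (fun i => (pvKey C i, i))).foldl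
          (fun d p => d.modify p.1 [] (· ++ [p.2])) PySem.Dict.empty) from by
    rw [List.foldl_map]; rfl]
  rw [PySem.Dict.getD_foldl_modify_append, PySem.Dict.getD_empty, List.nil_append]
  rw [List.filter_map, List.map_map]
  have h1 : ((fun p : Int × PVIntron => p.1 == c) ∘ (fun i => (pvKey C i, i))) =
      (fun i => pvKey C i == c) := rfl
  rw [h1, show ((fun p : Int × PVIntron => p.2) ∘ (fun i => (pvKey C i, i))) = id from rfl,
    List.map_id]

theorem pv_buckets_keys (L : List PVIntron) (C : PySem.Dict Int Int) :
    (bBuckets L C).keys = PySem.Set.ofList (L.map (pvKey C)) := by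
  unfold bBuckets
  show (List.foldl (fun d i => d.modify (pvKey C i) [] (· ++ [i]))
    PySem.Dict.empty L).keys = _
  rw [PySem.Dict.keys_foldl_modify_key L (pvKey C) [] (fun _ i l => l ++ [i])
    PySem.Dict.empty]
  rw [show (PySem.Dict.empty : PySem.Dict Int (List PVIntron)).keys = [] from rfl]
  exact PySem.Set.update_nil_left _

theorem pv_buckets_nodup (L : List PVIntron) (C : PySem.Dict Int Int) :
    (bBuckets L C).keys.Nodup := by
  unfold bBuckets
  show (List.foldl (fun d i => d.modify (pvKey C i) [] (· ++ [i]))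
    PySem.Dict.empty L).keys.Nodup
  exact PySem.Dict.nodup_keys_foldl_modify_key L (pvKey C) [] (fun _ i l => l ++ [i])
    PySem.Dict.empty (by rw [show (PySem.Dict.empty : PySem.Dict Int (List PVIntron)).keys = [] from rfl]; exact List.nodup_nil)

theorem pv_alt_eq (clusters : List PVIntron) (hne : clusters ≠ []) :
    refine_linked_alt clusters =
      (PySem.Set.ofList (clusters.map (pvKey (bComp clusters)))).map
        (fun cc => bReplay (clusters.filter
          (fun i => pvKey (bComp clusters) i == cc))) := by
  match clusters, hne with
  | c0 :: rest, _ =>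
    show ((bBuckets (c0 :: rest) (bComp (c0 :: rest))).values).map bReplay = _
    rw [pv_values_eq_keys_map _ (pv_buckets_nodup _ _), List.map_map, pv_buckets_keys]
    refine List.map_congr_left (fun cc _ => ?_)
    show bReplay ((bBuckets (c0 :: rest) (bComp (c0 :: rest))).getD cc []) = _
    rw [pv_buckets_getD]


-- ---------- S8: assembling the programs ----------

theorem pv_key_some (clusters : List PVIntron) {i : PVIntron} (hi : i ∈ clusters) :
    (bComp clusters).get? i.1.1 = some (pvKey (bComp clusters) i) := by
  have hs : ((bComp clusters).get? i.1.1).isSome :=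
    (pv_C_dom clusters i.1.1).mpr ⟨i, hi, Or.inl rfl⟩
  cases h : (bComp clusters).get? i.1.1 with
  | none => rw [h] at hs; exact Bool.noConfusion hs
  | some v =>
    show some v = some ((bComp clusters).getD i.1.1 0)
    rw [PySem.Dict.getD, h]
    rfl

theorem pv_mem_iff_key (clusters : List PVIntron) (c : Int) {i : PVIntron}
    (hi : i ∈ clusters) :
    pvM (bComp clusters) c i = (pvKey (bComp clusters) i == c) := by
  by_cases h : pvKey (bComp clusters) i = c
  · simp [pvM, pv_key_some clusters hi, h]
  · simp [pvM, pv_key_some clusters hi, h]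

theorem pv_filter_mem_eq (clusters : List PVIntron) (c : Int) (u : List PVIntron)
    (hu : ∀ i ∈ u, i ∈ clusters) :
    u.filter (pvM (bComp clusters) c) =
      u.filter (fun i => pvKey (bComp clusters) i == c) :=
  List.filter_congr (fun i hi => pv_mem_iff_key clusters c (hu i hi))

theorem pv_filter_not_mem_eq (clusters : List PVIntron) (c : Int) (u : List PVIntron)
    (hu : ∀ i ∈ u, i ∈ clusters) :
    u.filter (fun i => !(pvM (bComp clusters) c i)) =
      u.filter (fun i => !(pvKey (bComp clusters) i == c)) :=
  List.filter_congr (fun i hi => congrArg Bool.not (pv_mem_iff_key clusters c (hu i hi)))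

theorem pv_E1 (clusters : List PVIntron) (s : PVIntron) (u : List PVIntron)
    (hsmem : s ∈ clusters) (hu : ∀ i ∈ u, i ∈ clusters)
    (hcomp : clusters.filter (fun i => pvKey (bComp clusters) i ==
        pvKey (bComp clusters) s) =
      s :: u.filter (fun i => pvKey (bComp clusters) i == pvKey (bComp clusters) s)) :
    aExpand (u.length + 1) [s] (PySem.Set.ofList [s.1.1, s.1.2]) u =
      (bReplay (clusters.filter (fun i => pvKey (bComp clusters) i ==
          pvKey (bComp clusters) s)),
       u.filter (fun i => !(pvKey (bComp clusters) i == pvKey (bComp clusters) s))) := by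
  have hP : pvPure (bComp clusters) (pvKey (bComp clusters) s)
      (PySem.Set.ofList [s.1.1, s.1.2]) := by
    intro x hx
    have hx' := (PySem.Set.mem_ofList _ _).mp hx
    rcases List.mem_cons.mp hx' with h | h
    · rw [h]; exact pv_key_some clusters hsmem
    · rcases List.mem_singleton.mp h with rfl
      rw [← pv_C_ends clusters s hsmem]
      exact pv_key_some clusters hsmem
  have hE : ∀ i ∈ u, (bComp clusters).get? i.1.1 = (bComp clusters).get? i.1.2 :=
    fun i hi => pv_C_ends clusters i (hu i hi)
  have hum : u.filter (pvM (bComp clusters) (pvKey (bComp clusters) s)) =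
      u.filter (fun i => pvKey (bComp clusters) i == pvKey (bComp clusters) s) :=
    pv_filter_mem_eq clusters _ u hu
  obtain ⟨c1, c2, c3⟩ := pv_split (bComp clusters) (pvKey (bComp clusters) s)
    u.length u [s] (PySem.Set.ofList [s.1.1, s.1.2]) le_rfl hP hE
  have hfix : (pvExpandW [s] (PySem.Set.ofList [s.1.1, s.1.2])
      (u.filter (pvM (bComp clusters) (pvKey (bComp clusters) s)))).2 = [] := by
    refine pv_fix clusters (pvKey (bComp clusters) s) _ _ [s] _ le_rfl hP ?_ ?_ ?_ ?_ ?_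
    · intro i hi
      have := (List.mem_filter.mp hi).2
      rw [pvM] at this
      have h2 := of_decide_eq_true this
      exact h2
    · intro i hi; exact hu i (List.mem_filter.mp hi).1
    · intro i hiL hic
      have hkey : pvKey (bComp clusters) i = pvKey (bComp clusters) s := by
        have := pv_key_some clusters hiL
        rw [hic] at this
        exact (Option.some_injective _ this).symm
      have hmemf : i ∈ clusters.filter (fun j => pvKey (bComp clusters) j ==
          pvKey (bComp clusters) s) :=
        List.mem_filter.mpr ⟨hiL, by rw [hkey]; exact beq_self_eq_true _⟩
      rw [hcomp] at hmemf
      rcases List.mem_cons.mp hmemf with rfl | hmemf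
      · exact Or.inl List.mem_cons_self
      · right
        rw [hum]
        exact hmemf
    · intro j hj
      rcases List.mem_singleton.mp hj with rfl
      constructor
      · exact (PySem.Set.mem_ofList _ _).mpr List.mem_cons_self
      · exact (PySem.Set.mem_ofList _ _).mpr (by simp)
    · exact ⟨s.1.1, (PySem.Set.mem_ofList _ _).mpr List.mem_cons_self⟩
  rw [pv_aExpand_eq (u.length + 1) [s] _ u (Nat.lt_succ_self _)]
  have h1 : (pvExpandW [s] (PySem.Set.ofList [s.1.1, s.1.2]) u).1 =
      bReplay (clusters.filter (fun i => pvKey (bComp clusters) i ==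
        pvKey (bComp clusters) s)) := by
    rw [hcomp]
    show _ = bExpand ((u.filter (fun i => pvKey (bComp clusters) i ==
      pvKey (bComp clusters) s)).length + 1) [s] (PySem.Set.ofList [s.1.1, s.1.2]) _
    rw [pv_bExpand_eq _ _ _ _ (Nat.lt_succ_self _), ← hum]
    exact c1
  have h2 : (pvExpandW [s] (PySem.Set.ofList [s.1.1, s.1.2]) u).2 =
      u.filter (fun i => !(pvKey (bComp clusters) i == pvKey (bComp clusters) s)) := by
    have hnil : (pvExpandW [s] (PySem.Set.ofList [s.1.1, s.1.2]) u).2.filter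
        (pvM (bComp clusters) (pvKey (bComp clusters) s)) = [] := by
      rw [c2]; exact hfix
    rw [← pv_filter_not_mem_eq clusters _ u hu, ← c3,
      ← pv_filter_not_of_filter_nil hnil]
  rw [Prod.ext_iff]
  exact ⟨h1, h2⟩


theorem pv_hprime (clusters : List PVIntron) (s : PVIntron) (u : List PVIntron)
    (H : s :: u = clusters.filter (fun i => decide (pvKey (bComp clusters) i ∈
      (s :: u).map (pvKey (bComp clusters)))))
    (u' : List PVIntron)
    (hu'def : u' = u.filter (fun i => !(pvKey (bComp clusters) i ==
      pvKey (bComp clusters) s))) :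
    u' = clusters.filter (fun i => decide (pvKey (bComp clusters) i ∈
      u'.map (pvKey (bComp clusters)))) := by
  have h0 : u' = (s :: u).filter (fun i => !(pvKey (bComp clusters) i ==
      pvKey (bComp clusters) s)) := by
    rw [hu'def, List.filter_cons_of_neg (by simp)]
  conv_lhs => rw [h0, H]
  rw [List.filter_filter]
  refine List.filter_congr (fun i _ => ?_)
  by_cases hqc : pvKey (bComp clusters) i = pvKey (bComp clusters) s
  · have h1 : (decide (pvKey (bComp clusters) i ∈
        u'.map (pvKey (bComp clusters)))) = false := by
      rw [decide_eq_false_iff_not]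
      intro hc
      obtain ⟨j, hj, hkj⟩ := List.mem_map.mp hc
      rw [hu'def] at hj
      have := (List.mem_filter.mp hj).2
      rw [hkj, hqc] at this
      simp at this
    rw [h1]
    simp [hqc]
  · have h2 : (decide (pvKey (bComp clusters) i ∈
        u'.map (pvKey (bComp clusters)))) =
        (decide (pvKey (bComp clusters) i ∈ (s :: u).map (pvKey (bComp clusters)))) := by
      rw [decide_eq_decide]
      constructor
      · rintro hc
        obtain ⟨j, hj, hkj⟩ := List.mem_map.mp hc
        rw [h0] at hj
        exact List.mem_map.mpr ⟨j, (List.mem_filter.mp hj).1, hkj⟩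
      · rintro hc
        obtain ⟨j, hj, hkj⟩ := List.mem_map.mp hc
        refine List.mem_map.mpr ⟨j, ?_, hkj⟩
        rw [h0]
        refine List.mem_filter.mpr ⟨hj, ?_⟩
        rw [hkj]
        simp [hqc]
    rw [h2]
    simp [hqc]

theorem pv_hcomp (clusters : List PVIntron) (s : PVIntron) (u : List PVIntron)
    (H : s :: u = clusters.filter (fun i => decide (pvKey (bComp clusters) i ∈
      (s :: u).map (pvKey (bComp clusters))))) :
    clusters.filter (fun i => pvKey (bComp clusters) i == pvKey (bComp clusters) s) =
      s :: u.filter (fun i => pvKey (bComp clusters) i == pvKey (bComp clusters) s) := by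
  have hA : clusters.filter (fun i => pvKey (bComp clusters) i ==
      pvKey (bComp clusters) s) = (s :: u).filter (fun i => pvKey (bComp clusters) i ==
      pvKey (bComp clusters) s) := by
    conv_rhs => rw [H]
    rw [List.filter_filter]
    refine List.filter_congr (fun i _ => ?_)
    by_cases hk : pvKey (bComp clusters) i = pvKey (bComp clusters) s
    · have : (decide (pvKey (bComp clusters) i ∈
          (s :: u).map (pvKey (bComp clusters)))) = true := by
        rw [decide_eq_true_iff, hk]
        exact List.mem_map.mpr ⟨s, List.mem_cons_self, rfl⟩
      rw [this]
      simp [hk]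
    · simp [hk]
  rw [hA, List.filter_cons_of_pos (by simp)]

theorem pv_outer (clusters : List PVIntron) : ∀ (n : Nat) (rem : List PVIntron)
    (acc : List (List PVIntron)) (s : PVIntron) (u : List PVIntron),
    rem = s :: u → u ≠ [] → rem.length ≤ n →
    rem = clusters.filter (fun i => decide (pvKey (bComp clusters) i ∈
      rem.map (pvKey (bComp clusters)))) →
    aOuter n acc [s] (PySem.Set.ofList [s.1.1, s.1.2]) u =
      acc ++ (PySem.Set.ofList (rem.map (pvKey (bComp clusters)))).map
        (fun cc => bReplay (clusters.filter
          (fun i => pvKey (bComp clusters) i == cc))) := by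
  intro n
  induction n with
  | zero =>
    intro rem acc s u hrem _ hlen _
    subst hrem; simp at hlen
  | succ m ih =>
    intro rem acc s u hrem hune hlen H
    subst hrem
    have hsmem : s ∈ clusters := by
      have : s ∈ s :: u := List.mem_cons_self
      rw [H] at this
      exact (List.mem_filter.mp this).1
    have humem : ∀ i ∈ u, i ∈ clusters := by
      intro i hi
      have : i ∈ s :: u := List.mem_cons_of_mem _ hi
      rw [H] at this
      exact (List.mem_filter.mp this).1
    have hcomp := pv_hcomp clusters s u H
    have H' := pv_hprime clusters s u H
    -- the key-list of the remainder
    have hkeys : PySem.Set.ofList ((s :: u).map (pvKey (bComp clusters))) =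
        pvKey (bComp clusters) s :: PySem.Set.ofList
          ((u.filter (fun i => !(pvKey (bComp clusters) i ==
            pvKey (bComp clusters) s))).map (pvKey (bComp clusters))) := by
      rw [List.map_cons, pv_ofList_cons, List.filter_map]
      rfl
    cases u with
    | nil => exact absurd rfl hune
    | cons y u0 =>
      have hE1 := pv_E1 clusters s (y :: u0) hsmem humem hcomp
      have hE11 : (aExpand ((y :: u0).length + 1) [s]
          (PySem.Set.ofList [s.1.1, s.1.2]) (y :: u0)).1 =
          bReplay (clusters.filter (fun i => pvKey (bComp clusters) i ==
            pvKey (bComp clusters) s)) := by rw [hE1]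
      have hE2 : (aExpand ((y :: u0).length + 1) [s]
          (PySem.Set.ofList [s.1.1, s.1.2]) (y :: u0)).2 =
          (y :: u0).filter (fun i => !(pvKey (bComp clusters) i ==
            pvKey (bComp clusters) s)) := by rw [hE1]
      simp only [aOuter]
      rw [hE2, hE11, hkeys, List.map_cons]
      have H' := pv_hprime clusters s (y :: u0) H
        ((y :: u0).filter (fun i => !(pvKey (bComp clusters) i ==
          pvKey (bComp clusters) s))) rfl
      cases hu' : (y :: u0).filter (fun i => !(pvKey (bComp clusters) i ==
          pvKey (bComp clusters) s)) with
      | nil =>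
        simp
      | cons seed' rest' =>
        rw [hu'] at H'
        set CL := bReplay (clusters.filter (fun i => pvKey (bComp clusters) i ==
          pvKey (bComp clusters) s)) with hCL
        have hred : (match seed' :: rest' with
            | [] => acc ++ [CL]
            | seed :: rest => aOuter m (if rest = [] then acc ++ [CL] ++ [[seed]]
                else acc ++ [CL]) [seed] (PySem.Set.ofList [seed.1.1, seed.1.2]) rest)
            = aOuter m (if rest' = [] then acc ++ [CL] ++ [[seed']] else acc ++ [CL])
              [seed'] (PySem.Set.ofList [seed'.1.1, seed'.1.2]) rest' := rfl
        rw [hred]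
        by_cases hr : rest' = []
        · subst hr
          rw [if_pos rfl]
          have hsingle : clusters.filter (fun i => pvKey (bComp clusters) i ==
              pvKey (bComp clusters) seed') = [seed'] := by
            have hA : clusters.filter (fun i => pvKey (bComp clusters) i ==
                pvKey (bComp clusters) seed') = [seed'].filter
                  (fun i => pvKey (bComp clusters) i == pvKey (bComp clusters) seed') := by
              conv_rhs => rw [H']
              rw [List.filter_filter]
              refine List.filter_congr (fun i _ => ?_)
              by_cases hk : pvKey (bComp clusters) i = pvKey (bComp clusters) seed'
              · have hd : (decide (pvKey (bComp clusters) i ∈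
                    [seed'].map (pvKey (bComp clusters)))) = true := by
                  rw [decide_eq_true_iff, hk]
                  exact List.mem_map.mpr ⟨seed', List.mem_cons_self, rfl⟩
                rw [hd]
                simp [hk]
              · simp [hk]
            rw [hA, List.filter_cons_of_pos (by simp), List.filter_nil]
          have hofl : PySem.Set.ofList [pvKey (bComp clusters) seed'] =
              [pvKey (bComp clusters) seed'] := rfl
          simp only [aOuter, hofl, List.map_cons, List.map_nil]
          rw [hsingle]
          simp [bReplay, bExpand]
        · have hlen' : (seed' :: rest').length ≤ m := by
            have h1 : ((y :: u0).filter (fun i => !(pvKey (bComp clusters) i ==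
                pvKey (bComp clusters) s))).length ≤ (y :: u0).length :=
              List.length_filter_le _ _
            rw [hu'] at h1
            simp only [List.length_cons] at hlen h1 ⊢
            omega
          rw [if_neg hr]
          rw [ih (seed' :: rest') (acc ++ [bReplay (clusters.filter
            (fun i => pvKey (bComp clusters) i == pvKey (bComp clusters) s))])
            seed' rest' rfl hr hlen' H']
          rw [List.append_assoc]
          rfl

theorem pv_main : ∀ (clusters : List ((Int × Int) × Int)), clusters ≠ [] →
    clusters.length ≠ 1 → refine_linked clusters = refine_linked_alt clusters := by
  intro clusters hne hlen
  match clusters, hne, hlen with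
  | c0 :: y :: rest, _, _ =>
    have H : (c0 :: y :: rest) = (c0 :: y :: rest).filter
        (fun i => decide (pvKey (bComp (c0 :: y :: rest)) i ∈
          (c0 :: y :: rest).map (pvKey (bComp (c0 :: y :: rest))))) :=
      (List.filter_eq_self.mpr (fun i hi =>
        decide_eq_true (List.mem_map.mpr ⟨i, hi, rfl⟩))).symm
    show aOuter (c0 :: y :: rest).length [] [c0] (PySem.Set.ofList [c0.1.1, c0.1.2])
        (y :: rest) = _
    rw [pv_outer (c0 :: y :: rest) (c0 :: y :: rest).length (c0 :: y :: rest) []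
      c0 (y :: rest) rfl (List.cons_ne_nil _ _) le_rfl H]
    rw [pv_alt_eq _ (List.cons_ne_nil _ _), List.nil_append]

theorem pv_singleton : ∀ (i : PVIntron), refine_linked_alt [i] = [[i]] := by
  intro i
  show ((bBuckets [i] (bComp [i])).values).map bReplay = [[i]]
  have hC : bComp [i] = ((PySem.Dict.empty.insert i.1.1 0).insert i.1.2 0) := by
    show (bUnionStep (PySem.Dict.empty, PySem.Dict.empty, 0) i).1 = _
    simp only [bUnionStep, PySem.Dict.get?_empty]
  have hkey : (bComp [i]).getD i.1.1 0 = 0 := by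
    rw [hC]
    by_cases h : i.1.1 = i.1.2 <;>
      simp [PySem.Dict.getD, PySem.Dict.get?_insert, h]
  show ((PySem.Dict.empty.modify ((bComp [i]).getD i.1.1 0) [] (· ++ [i])).values).map
      bReplay = [[i]]
  rw [hkey]
  rfl


-- ===== VERDICT (by name: the statement is the Claim_ definition above) =====
theorem refine_linked_spec : Claim_unchanged_refine_linked := by
  intro clusters _ hpre hd
  exact pv_main clusters hpre hd

theorem refine_linked_changed : Claim_changed_refine_linked := by
  unfold Claim_changed_refine_linked; decide

theorem refine_linked_tight : Claim_exact_refine_linked := by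
  intro clusters _ _ hd
  obtain ⟨i, rfl⟩ : ∃ i, clusters = [i] := by
    match clusters, hd with
    | [i], _ => exact ⟨i, rfl⟩
  rw [pv_singleton]
  intro h
  have : refine_linked [i] = [] := rfl
  rw [this] at h; exact List.cons_ne_nil _ _ h.symm
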